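-- pv_equiv track=rewrite | github.com/xiaofanc/leetcode | tiktok/shared-interests.py | MaxSHARED
-- ===== SOURCE A (Python) =====
-- from collections import defaultdict
-- from itertools import combinations
--
-- def MaxSHARED(friends_from, friends_to, friends_weight):
-- 	interestmap = defaultdict(lambda: defaultdict(set))
-- 	# create the interest to adjacency map
-- 	for source, dest, w in zip(friends_from, friends_to, friends_weight):
-- 		interestmap[w][source].add(dest)
-- 		interestmap[w][dest].add(source)
--
-- 	# get the connected nodes for each interst
-- 	paircount = defaultdict(int)
-- 	for w, adjmap in interestmap.items():
-- 		visited = set()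
-- 		for node in adjmap:
-- 			cc = []
-- 			dfs(node, adjmap, visited, cc)
-- 			for s, t in combinations(cc,2):
-- 				a, b = min(s,t), max(s,t)
-- 				paircount[(a,b)] += 1
--
-- 	# check the maximal interest
-- 	max_interest = max(paircount.values())
-- 	return max(a * b for (a,b), v in paircount.items() if v == max_interest)
--
-- def dfs(node, adjmap, visited, cc):
-- 	if node in visited:
-- 		return
-- 	visited.add(node)
-- 	cc.append(node)
-- 	for neighbor in adjmap[node]:
-- 		dfs(neighbor, adjmap, visited, cc)
-- ===== SOURCE B (Python) =====
-- from itertools import combinations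
--
--
-- def _locate(blocks, x):
--     for i, b in enumerate(blocks):
--         if x in b:
--             return i
--     return -1
--
--
-- def MaxSHARED(friends_from, friends_to, friends_weight):
--     # group the edges by interest
--     edgemap = {}
--     for s, t, w in zip(friends_from, friends_to, friends_weight):
--         edgemap.setdefault(w, []).append((s, t))
--
--     paircount = {}
--     for w, edges in edgemap.items():
--         # disjoint-set blocks: merge the two blocks touched by each edge
--         blocks = []
--         for s, t in edges:
--             i = _locate(blocks, s)
--             j = _locate(blocks, t)
--             if i == -1 and j == -1:
--                 blocks.append([s] if s == t else [s, t])
--             elif i == -1: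
--                 blocks[j].append(s)
--             elif j == -1:
--                 blocks[i].append(t)
--             elif i != j:
--                 blocks[i] = blocks[i] + blocks[j]
--                 del blocks[j]
--         for b in blocks:
--             for x, y in combinations(b, 2):
--                 key = (min(x, y), max(x, y))
--                 paircount[key] = paircount.get(key, 0) + 1
--
--     best = max(paircount.values())
--     return max(a * b for (a, b), v in paircount.items() if v == best)
-- ===== Notes on version B (the rewrite author's own statement) =====
-- stated objective: faster
-- what changed: A discovers each interest's connected components by recursive DFS over a nested defaultdict adjacency map; B replaces that with an incremental disjoint-set structure: per interest it scans the edge list once, merging the two blocks touched by each edge, then counts pairs per block (no adjacency dict, no recursion, no per-node visited set).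
-- outside the precondition, e.g. on MaxSHARED([1], [1], [5]): A raises ValueError, B raises ValueError; on MaxSHARED([], [], []): A raises ValueError, B raises ValueError
import Mathlib
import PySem

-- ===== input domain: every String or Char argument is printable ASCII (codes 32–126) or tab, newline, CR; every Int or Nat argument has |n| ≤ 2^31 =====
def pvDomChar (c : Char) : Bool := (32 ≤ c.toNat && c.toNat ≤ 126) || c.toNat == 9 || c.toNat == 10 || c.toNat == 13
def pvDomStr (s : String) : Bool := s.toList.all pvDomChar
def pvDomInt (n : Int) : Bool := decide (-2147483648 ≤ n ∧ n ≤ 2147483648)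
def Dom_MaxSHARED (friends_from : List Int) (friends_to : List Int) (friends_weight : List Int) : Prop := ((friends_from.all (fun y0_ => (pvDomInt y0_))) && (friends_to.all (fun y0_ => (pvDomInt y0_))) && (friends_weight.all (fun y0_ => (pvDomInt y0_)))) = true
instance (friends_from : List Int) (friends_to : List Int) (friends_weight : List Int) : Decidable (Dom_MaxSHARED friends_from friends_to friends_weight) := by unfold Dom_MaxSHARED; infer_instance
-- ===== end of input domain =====

-- B replaces A's recursive DFS component discovery by an incremental disjoint-set block merge per interest (measurably faster in a timing run; same counting and result).
-- A raises ValueError (max of empty) when no edge has two distinct endpoints: excluded by Pre_.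

-- ===== PORT A =====

-- interestmap[w][source].add(dest); interestmap[w][dest].add(source)  (two defaultdict accesses, in order)
def pvBuildStepA (im : PySem.Dict Int (PySem.Dict Int (PySem.Set Int)))
    (e : (Int × Int) × Int) : PySem.Dict Int (PySem.Dict Int (PySem.Set Int)) :=
  let s := e.1.1
  let t := e.1.2
  let w := e.2
  let inner := im.getD w PySem.Dict.empty
  let inner := inner.insert s (PySem.Set.add (inner.getD s PySem.Set.empty) t)
  let im := im.insert w inner
  let inner2 := im.getD w PySem.Dict.empty
  let inner2 := inner2.insert t (PySem.Set.add (inner2.getD t PySem.Set.empty) s)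
  im.insert w inner2

-- the recursive dfs; fuel = (number of keys of adjmap) + 1 bounds the recursion depth,
-- which is enough because every non-returning call adds a fresh key to visited
def pvDfsA (adj : PySem.Dict Int (PySem.Set Int)) :
    Nat → Int → (PySem.Set Int × List Int) → (PySem.Set Int × List Int)
  | 0, _, st => st
  | fuel + 1, node, (vis, cc) =>
    if node ∈ vis then (vis, cc)
    else
      let vis := PySem.Set.add vis node
      let cc := cc ++ [node]
      (adj.getD node PySem.Set.empty).foldl (fun st nb => pvDfsA adj fuel nb st) (vis, cc)

-- the normalized pair (min(s,t), max(s,t)) of a combination [s,t] (shared by both ports)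
def pvNorm (c : List Int) : Int × Int :=
  match c with
  | [s, t] => (min s t, max s t)
  | _ => (0, 0)   -- unreachable: combinations _ 2 yields two-element lists

def MaxSHARED (friends_from : List Int) (friends_to : List Int) (friends_weight : List Int) : Int :=
  let im := ((friends_from.zip friends_to).zip friends_weight).foldl pvBuildStepA PySem.Dict.empty
  let pc := im.items.foldl
    (fun pc wadj =>
      let adj := wadj.2
      (adj.keys.foldl
        (fun (st : PySem.Set Int × PySem.Dict (Int × Int) Int) node =>
          let vis := st.1
          let pc := st.2
          let r := pvDfsA adj (adj.keys.length + 1) node (vis, [])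
          (r.1, (PySem.List.combinations r.2 2).foldl
                  (fun pc c => pc.modify (pvNorm c) 0 (· + 1)) pc))
        (PySem.Set.empty, pc)).2)
    PySem.Dict.empty
  match PySem.List.max? pc.values (fun v => v) with
  | none => 0   -- max(paircount.values()) raises ValueError here: excluded by Pre_
  | some m =>
    (PySem.List.max?
      ((pc.items.filter (fun kv => kv.2 == m)).map (fun kv => kv.1.1 * kv.1.2))
      (fun x => x)).getD 0

-- ===== PORT B =====

-- _locate(blocks, x): index of the block containing x, else -1
def pvLocateAux (blocks : List (List Int)) (x : Int) (i : Int) : Int :=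
  match blocks with
  | [] => -1
  | b :: rest => if x ∈ b then i else pvLocateAux rest x (i + 1)

def pvLocate (blocks : List (List Int)) (x : Int) : Int := pvLocateAux blocks x 0

-- one edge of the disjoint-set merge loop
def pvMergeStep (blocks : List (List Int)) (e : Int × Int) : List (List Int) :=
  let s := e.1
  let t := e.2
  let i := pvLocate blocks s
  let j := pvLocate blocks t
  if i = -1 ∧ j = -1 then blocks ++ [if s = t then [s] else [s, t]]
  else if i = -1 then blocks.set j.toNat ((blocks.getD j.toNat []) ++ [s])
  else if j = -1 then blocks.set i.toNat ((blocks.getD i.toNat []) ++ [t])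
  else if i ≠ j then
    (blocks.set i.toNat ((blocks.getD i.toNat []) ++ (blocks.getD j.toNat []))).eraseIdx j.toNat
  else blocks

def MaxSHARED_alt (friends_from : List Int) (friends_to : List Int) (friends_weight : List Int) : Int :=
  let em := ((friends_from.zip friends_to).zip friends_weight).foldl
    (fun em e => em.modify e.2 [] (· ++ [e.1])) PySem.Dict.empty
  let pc := em.items.foldl
    (fun pc we =>
      let blocks := we.2.foldl pvMergeStep []
      blocks.foldl
        (fun pc b =>
          (PySem.List.combinations b 2).foldl
            (fun pc c => pc.insert (pvNorm c) (pc.getD (pvNorm c) 0 + 1)) pc)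
        pc)
    (PySem.Dict.empty : PySem.Dict (Int × Int) Int)
  match PySem.List.max? pc.values (fun v => v) with
  | none => 0   -- unreachable under Pre_
  | some best =>
    (PySem.List.max?
      ((pc.items.filter (fun kv => kv.2 == best)).map (fun kv => kv.1.1 * kv.1.2))
      (fun x => x)).getD 0

-- ===== PRECONDITION & SPEC =====
-- Pre_ excludes exactly the inputs where A's max() is applied to an empty collection and raises
-- ValueError: no (zip-truncated) edge has two distinct endpoints.
def Pre_MaxSHARED (friends_from : List Int) (friends_to : List Int) (friends_weight : List Int) : Prop :=
  ∃ p ∈ (friends_from.zip friends_to).zip friends_weight, p.1.1 ≠ p.1.2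
instance (friends_from : List Int) (friends_to : List Int) (friends_weight : List Int) : Decidable (Pre_MaxSHARED friends_from friends_to friends_weight) := by unfold Pre_MaxSHARED; infer_instance

def pvWitness_MaxSHARED : List Int × List Int × List Int := ([1, 2], [2, 3], [7, 7])

def Spec_MaxSHARED (friends_from : List Int) (friends_to : List Int) (friends_weight : List Int) (out : Int) : Prop := out = MaxSHARED_alt friends_from friends_to friends_weight
instance (friends_from : List Int) (friends_to : List Int) (friends_weight : List Int) (out : Int) : Decidable (Spec_MaxSHARED friends_from friends_to friends_weight out) := by unfold Spec_MaxSHARED; infer_instance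

-- ===== CLAIM (what is proved, stated in full; the proofs are below) =====
def Claim_equal_MaxSHARED : Prop := ∀ (friends_from : List Int) (friends_to : List Int) (friends_weight : List Int), Dom_MaxSHARED friends_from friends_to friends_weight → Pre_MaxSHARED friends_from friends_to friends_weight → Spec_MaxSHARED friends_from friends_to friends_weight (MaxSHARED friends_from friends_to friends_weight)

-- ===== LEMMAS AND PROOFS =====


-- ------------------------------------------------------------------
-- Proof layer.  Shared abstractions: edges E of one interest, the
-- symmetric edge relation pvR, connectivity pvConn, node list.
-- ------------------------------------------------------------------

def pvR (E : List (Int × Int)) (x y : Int) : Prop := (x, y) ∈ E ∨ (y, x) ∈ E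

def pvConn (E : List (Int × Int)) : Int → Int → Prop := Relation.ReflTransGen (pvR E)

def pvNodes (E : List (Int × Int)) : List Int := E.flatMap (fun e => [e.1, e.2])

-- normalized pairs of a component list
def pvPairsOf (l : List Int) : List (Int × Int) := (PySem.List.combinations l 2).map pvNorm

-- A's per-interest emitted pair stream (visited shared over the key loop)
def pvStreamA (adj : PySem.Dict Int (PySem.Set Int)) : List (Int × Int) :=
  (adj.keys.foldl
    (fun (st : PySem.Set Int × List (Int × Int)) node =>
      let r := pvDfsA adj (adj.keys.length + 1) node (st.1, [])
      (r.1, st.2 ++ pvPairsOf r.2))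
    (PySem.Set.empty, [])).2

-- B's per-interest emitted pair stream
def pvStreamB (edges : List (Int × Int)) : List (Int × Int) :=
  ((edges.foldl pvMergeStep []).flatMap (fun b => (PySem.List.combinations b 2).map pvNorm))

-- adjacency built from an interest's edge list (A's inner dict, per interest)
def pvAdjStep (a : PySem.Dict Int (PySem.Set Int)) (s t : Int) : PySem.Dict Int (PySem.Set Int) :=
  let a := a.insert s (PySem.Set.add (a.getD s PySem.Set.empty) t)
  a.insert t (PySem.Set.add (a.getD t PySem.Set.empty) s)

def pvAdj (E : List (Int × Int)) : PySem.Dict Int (PySem.Set Int) :=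
  E.foldl (fun a e => pvAdjStep a e.1 e.2) PySem.Dict.empty

-- the edges of interest v, in order
def pvE (Z : List ((Int × Int) × Int)) (v : Int) : List (Int × Int) :=
  (Z.filter (fun e => e.2 == v)).map (·.1)

-- the shared final extraction (max count, then max product among arg-max pairs)
def pvExtract (d : PySem.Dict (Int × Int) Int) : Int :=
  match PySem.List.max? d.values (fun v => v) with
  | none => 0
  | some m =>
    (PySem.List.max?
      ((d.items.filter (fun kv => kv.2 == m)).map (fun kv => kv.1.1 * kv.1.2))
      (fun x => x)).getD 0

-- ==================================================================
-- 0. generic helpers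
-- ==================================================================

theorem pvMax?_perm (l l' : List Int) (h : l.Perm l') :
    PySem.List.max? l (fun x => x) = PySem.List.max? l' (fun x => x) := by
  cases hl : PySem.List.max? l (fun x => x) with
  | none =>
    rw [PySem.List.max?_eq_none_iff] at hl
    subst hl
    rw [(PySem.List.max?_eq_none_iff l' _).2 h.symm.eq_nil]
  | some m =>
    cases hl' : PySem.List.max? l' (fun x => x) with
    | none =>
      rw [PySem.List.max?_eq_none_iff] at hl'
      subst hl'
      rw [h.eq_nil] at hl
      simp [PySem.List.max?] at hl
    | some m' =>
      have h1 := PySem.List.max?_isMax hl' _ (h.mem_iff.1 (PySem.List.max?_mem hl))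
      have h2 := PySem.List.max?_isMax hl _ (h.mem_iff.2 (PySem.List.max?_mem hl'))
      simp only [le_antisymm h2 h1]

theorem pvExtract_perm (d d' : PySem.Dict (Int × Int) Int) (h : d.items.Perm d'.items) :
    pvExtract d = pvExtract d' := by
  have hv : d.values.Perm d'.values := by
    simp only [PySem.Dict.values]
    exact h.map _
  unfold pvExtract
  rw [pvMax?_perm _ _ hv]
  cases PySem.List.max? d'.values (fun v => v) with
  | none => rfl
  | some m =>
    dsimp only
    rw [pvMax?_perm _ _ (((h.filter (fun kv => kv.2 == m))).map (fun kv => kv.1.1 * kv.1.2))]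

theorem pvCounter_items_perm (s s' : List (Int × Int)) (h : s.Perm s') :
    (PySem.Dict.counter s).items.Perm (PySem.Dict.counter s').items := by
  rw [PySem.Dict.items_counter, PySem.Dict.items_counter]
  have hs : (PySem.Set.ofList s).Perm (PySem.Set.ofList s') := by
    rw [List.perm_ext_iff_of_nodup (PySem.Set.nodup_ofList s) (PySem.Set.nodup_ofList s')]
    intro a
    rw [PySem.Set.mem_ofList, PySem.Set.mem_ofList]
    exact h.mem_iff
  have h2 : (PySem.Set.ofList s').map (fun k => (k, (s.count k : Int)))
      = (PySem.Set.ofList s').map (fun k => (k, (s'.count k : Int))) := by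
    apply List.map_congr_left
    intro k _
    rw [h.count_eq]
  exact h2 ▸ hs.map _

theorem pvFlatMap_perm {α β : Type} (ks : List α) (f g : α → List β)
    (h : ∀ v ∈ ks, (f v).Perm (g v)) : (ks.flatMap f).Perm (ks.flatMap g) := by
  induction ks with
  | nil => rfl
  | cons k ks ih =>
    simp only [List.flatMap_cons]
    exact (h k (by simp)).append (ih (fun v hv => h v (by simp [hv])))

-- ==================================================================
-- 1. reduction of both ports to counters of streams
-- ==================================================================

-- accumulating form of the A stream loop
theorem pvStreamAccA (adj : PySem.Dict Int (PySem.Set Int)) (ks : List Int) :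
    ∀ (vis : PySem.Set Int) (out : List (Int × Int)),
      ks.foldl
        (fun (st : PySem.Set Int × List (Int × Int)) node =>
          let r := pvDfsA adj (adj.keys.length + 1) node (st.1, [])
          (r.1, st.2 ++ pvPairsOf r.2)) (vis, out)
      = ((ks.foldl
          (fun (st : PySem.Set Int × List (Int × Int)) node =>
            let r := pvDfsA adj (adj.keys.length + 1) node (st.1, [])
            (r.1, st.2 ++ pvPairsOf r.2)) (vis, [])).1,
         out ++ (ks.foldl
          (fun (st : PySem.Set Int × List (Int × Int)) node =>
            let r := pvDfsA adj (adj.keys.length + 1) node (st.1, [])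
            (r.1, st.2 ++ pvPairsOf r.2)) (vis, [])).2) := by
  induction ks with
  | nil => intro vis out; simp
  | cons n ks ih =>
    intro vis out
    simp only [List.foldl_cons]
    rw [ih _ (out ++ _), ih _ ([] ++ _)]
    simp

theorem pvCombFoldA (cc : List Int) (pc : PySem.Dict (Int × Int) Int) :
    (PySem.List.combinations cc 2).foldl (fun pc c => pc.modify (pvNorm c) 0 (· + 1)) pc
      = (pvPairsOf cc).foldl (fun pc p => pc.modify p 0 (· + 1)) pc := by
  rw [pvPairsOf, List.foldl_map]

-- the paircount thread of A's inner loop is the bump-fold of the emitted stream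
theorem pvInnerA (adj : PySem.Dict Int (PySem.Set Int)) (ks : List Int) :
    ∀ (vis : PySem.Set Int) (pc : PySem.Dict (Int × Int) Int),
      (ks.foldl
        (fun (st : PySem.Set Int × PySem.Dict (Int × Int) Int) node =>
          ((pvDfsA adj (adj.keys.length + 1) node (st.1, [])).1,
           (PySem.List.combinations (pvDfsA adj (adj.keys.length + 1) node (st.1, [])).2 2).foldl
             (fun pc c => pc.modify (pvNorm c) 0 (· + 1)) st.2))
        (vis, pc)).2
      = ((ks.foldl
          (fun (st : PySem.Set Int × List (Int × Int)) node =>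
            let r := pvDfsA adj (adj.keys.length + 1) node (st.1, [])
            (r.1, st.2 ++ pvPairsOf r.2)) (vis, [])).2).foldl
          (fun pc p => pc.modify p 0 (· + 1)) pc := by
  induction ks with
  | nil => intro vis pc; simp
  | cons n ks ih =>
    intro vis pc
    simp only [List.foldl_cons, List.nil_append]
    rw [ih, pvCombFoldA,
      pvStreamAccA adj ks _ (pvPairsOf (pvDfsA adj (adj.keys.length + 1) n (vis, [])).2),
      List.foldl_append]

-- same decoupling for B's inner (per-interest) loop
theorem pvInnerB (blocks : List (List Int)) :
    ∀ (pc : PySem.Dict (Int × Int) Int),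
      blocks.foldl
        (fun pc b =>
          (PySem.List.combinations b 2).foldl
            (fun pc c => pc.insert (pvNorm c) (pc.getD (pvNorm c) 0 + 1)) pc) pc
      = (blocks.flatMap (fun b => (PySem.List.combinations b 2).map pvNorm)).foldl
          (fun pc p => pc.insert p (pc.getD p 0 + 1)) pc := by
  induction blocks with
  | nil => intro pc; rfl
  | cons b bs ih =>
    intro pc
    simp only [List.foldl_cons, List.flatMap_cons, List.foldl_append]
    rw [ih, List.foldl_map]

theorem pvA_eq_counter (f t w : List Int) :
    MaxSHARED f t w =
      pvExtract (PySem.Dict.counter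
        ((((f.zip t).zip w).foldl pvBuildStepA PySem.Dict.empty).items.flatMap
          (fun wadj => pvStreamA wadj.2))) := by
  have houter : ∀ (items : List (Int × PySem.Dict Int (PySem.Set Int)))
      (pc : PySem.Dict (Int × Int) Int),
      items.foldl
        (fun pc wadj =>
          (wadj.2.keys.foldl
            (fun (st : PySem.Set Int × PySem.Dict (Int × Int) Int) node =>
              ((pvDfsA wadj.2 (wadj.2.keys.length + 1) node (st.1, [])).1,
               (PySem.List.combinations (pvDfsA wadj.2 (wadj.2.keys.length + 1) node (st.1, [])).2 2).foldl
                 (fun pc c => pc.modify (pvNorm c) 0 (· + 1)) st.2))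
            (PySem.Set.empty, pc)).2) pc
      = (items.flatMap (fun wadj => pvStreamA wadj.2)).foldl
          (fun pc p => pc.modify p 0 (· + 1)) pc := by
    intro items
    induction items with
    | nil => intro pc; rfl
    | cons it its ih =>
      intro pc
      simp only [List.foldl_cons, List.flatMap_cons, List.foldl_append]
      rw [ih, pvInnerA]
      rfl
  rw [PySem.Dict.counter_eq_foldl]
  unfold MaxSHARED
  dsimp only
  rw [houter]
  rfl

theorem pvB_eq_counter (f t w : List Int) :
    MaxSHARED_alt f t w =
      pvExtract (PySem.Dict.counter
        ((((f.zip t).zip w).foldl (fun em (e : (Int × Int) × Int) => em.modify e.2 [] (· ++ [e.1]))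
            PySem.Dict.empty).items.flatMap (fun we => pvStreamB we.2))) := by
  have houter : ∀ (items : List (Int × List (Int × Int)))
      (pc : PySem.Dict (Int × Int) Int),
      items.foldl
        (fun pc we =>
          (we.2.foldl pvMergeStep []).foldl
            (fun pc b =>
              (PySem.List.combinations b 2).foldl
                (fun pc c => pc.insert (pvNorm c) (pc.getD (pvNorm c) 0 + 1)) pc) pc) pc
      = (items.flatMap (fun we => pvStreamB we.2)).foldl
          (fun pc p => pc.insert p (pc.getD p 0 + 1)) pc := by
    intro items
    induction items with
    | nil => intro pc; rfl
    | cons it its ih =>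
      intro pc
      simp only [List.foldl_cons, List.flatMap_cons, List.foldl_append]
      rw [ih, pvInnerB]
      rfl
  rw [← PySem.Dict.foldl_insert_getD_add_one_eq_counter]
  unfold MaxSHARED_alt
  dsimp only
  rw [houter]
  rfl

-- ==================================================================
-- 2. the two grouping dicts have the same keys and matching payloads
-- ==================================================================

-- pvBuildStepA is an insert-at-key step
theorem pvBuildStepA_eq :
    pvBuildStepA = fun im e => im.insert e.2 (pvAdjStep (im.getD e.2 PySem.Dict.empty) e.1.1 e.1.2) := by
  funext im e
  simp [pvBuildStepA, pvAdjStep, PySem.Dict.getD_insert_self, PySem.Dict.insert_insert_self]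

-- fold that groups by key: the value at v is the fold of the edges with key v
theorem pvGroupFold {ν : Type} (g : ν → (Int × Int) × Int → ν) (d0 : ν) :
    ∀ (Z : List ((Int × Int) × Int)) (d : PySem.Dict Int ν) (v : Int),
      (Z.foldl (fun d e => d.insert e.2 (g (d.getD e.2 d0) e)) d).getD v d0
        = (Z.filter (fun e => e.2 == v)).foldl g (d.getD v d0) := by
  intro Z
  induction Z with
  | nil => intro d v; rfl
  | cons e Z ih =>
    intro d v
    simp only [List.foldl_cons, List.filter_cons]
    by_cases h : e.2 = v
    · simp only [h, BEq.rfl, if_pos, ih, List.foldl_cons, PySem.Dict.getD_insert_self]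
    · have hbe : (e.2 == v) = false := by simp [h]
      simp only [hbe, Bool.false_eq_true, if_false, ih,
        PySem.Dict.getD_insert, if_neg (Ne.symm h)]

theorem pvA_items (Z : List ((Int × Int) × Int)) :
    (Z.foldl pvBuildStepA PySem.Dict.empty).items
      = (PySem.Set.ofList (Z.map (·.2))).map (fun v => (v, pvAdj (pvE Z v))) := by
  rw [pvBuildStepA_eq]
  have hnd : (Z.foldl (fun im e => im.insert e.2 (pvAdjStep (im.getD e.2 PySem.Dict.empty) e.1.1 e.1.2)) PySem.Dict.empty).keys.Nodup := by
    apply PySem.Dict.nodup_keys_foldl_insert_key Z (fun e => e.2)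
      (fun d e => pvAdjStep (d.getD e.2 PySem.Dict.empty) e.1.1 e.1.2)
    simp
  rw [PySem.Dict.items_eq_map_keys _ hnd PySem.Dict.empty,
    PySem.Dict.keys_foldl_insert_key Z (fun e => e.2)
      (fun d e => pvAdjStep (d.getD e.2 PySem.Dict.empty) e.1.1 e.1.2)]
  simp only [PySem.Dict.keys_empty, PySem.Set.update_nil_left]
  apply List.map_congr_left
  intro v _
  rw [pvGroupFold (fun a e => pvAdjStep a e.1.1 e.1.2) PySem.Dict.empty Z PySem.Dict.empty v]
  rw [pvAdj, pvE, List.foldl_map]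
  rfl

theorem pvB_items (Z : List ((Int × Int) × Int)) :
    (Z.foldl (fun em (e : (Int × Int) × Int) => em.modify e.2 [] (· ++ [e.1])) PySem.Dict.empty).items
      = (PySem.Set.ofList (Z.map (·.2))).map (fun v => (v, pvE Z v)) := by
  have hnd : (Z.foldl (fun em (e : (Int × Int) × Int) => em.modify e.2 [] (· ++ [e.1])) PySem.Dict.empty).keys.Nodup := by
    apply PySem.Dict.nodup_keys_foldl_modify_key Z (fun e => e.2) [] (fun _ e v => v ++ [e.1])
    simp
  rw [PySem.Dict.items_eq_map_keys _ hnd [],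
    PySem.Dict.keys_foldl_modify_key Z (fun e => e.2) [] (fun _ e v => v ++ [e.1])]
  simp only [PySem.Dict.keys_empty, PySem.Set.update_nil_left]
  apply List.map_congr_left
  intro v _
  have hsw : Z.foldl (fun em (e : (Int × Int) × Int) => em.modify e.2 [] (· ++ [e.1])) PySem.Dict.empty
      = (Z.map (fun e => (e.2, e.1))).foldl (fun d p => d.modify p.1 [] (· ++ [p.2])) PySem.Dict.empty := by
    rw [List.foldl_map]
  rw [hsw, PySem.Dict.getD_foldl_modify_append]
  simp only [List.filter_map, PySem.Dict.getD_empty, List.map_map, List.nil_append]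
  rfl

-- ==================================================================
-- 3. the per-interest pair streams are permutations of each other:
--    both enumerate { (a,b) | a < b, a connected to b } exactly once
-- ==================================================================

-- ==================================================================
-- 3a. relation basics
-- ==================================================================

theorem pvR_symm {E : List (Int × Int)} {x y : Int} (h : pvR E x y) : pvR E y x := Or.symm h

theorem pvConn_symm {E : List (Int × Int)} {x y : Int} (h : pvConn E x y) : pvConn E y x :=
  Relation.ReflTransGen.symmetric (fun _ _ hr => Or.symm hr) h

theorem pvR_mem_nodes {E : List (Int × Int)} {x y : Int} (h : pvR E x y) :
    x ∈ pvNodes E ∧ y ∈ pvNodes E := by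
  rcases h with h | h
  · exact ⟨List.mem_flatMap.2 ⟨(x, y), h, by simp⟩, List.mem_flatMap.2 ⟨(x, y), h, by simp⟩⟩
  · exact ⟨List.mem_flatMap.2 ⟨(y, x), h, by simp⟩, List.mem_flatMap.2 ⟨(y, x), h, by simp⟩⟩

theorem pvConn_of_not_node {E : List (Int × Int)} {x y : Int}
    (hx : x ∉ pvNodes E) (h : pvConn E x y) : y = x := by
  rcases h.cases_head with h | ⟨c, hr, _⟩
  · exact h.symm
  · exact absurd (pvR_mem_nodes hr).1 hx

theorem pvConn_mem_nodes {E : List (Int × Int)} {x y : Int}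
    (h : pvConn E x y) (hne : x ≠ y) : x ∈ pvNodes E ∧ y ∈ pvNodes E := by
  constructor
  · rcases h.cases_head with h | ⟨c, hr, _⟩
    · exact absurd h hne
    · exact (pvR_mem_nodes hr).1
  · rcases (pvConn_symm h).cases_head with h | ⟨c, hr, _⟩
    · exact absurd h.symm hne
    · exact (pvR_mem_nodes hr).1

theorem pvConn_mono_snoc {E : List (Int × Int)} {e : Int × Int} {x y : Int}
    (h : pvConn E x y) : pvConn (E ++ [e]) x y :=
  h.mono (fun a b hr => by rcases hr with hr | hr <;> [left; right] <;> simp [hr])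

theorem pvConn_snoc {E : List (Int × Int)} {s t x y : Int} :
    pvConn (E ++ [(s, t)]) x y ↔
      pvConn E x y ∨ (pvConn E x s ∧ pvConn E t y) ∨ (pvConn E x t ∧ pvConn E s y) := by
  constructor
  · intro h
    induction h with
    | refl => exact Or.inl Relation.ReflTransGen.refl
    | tail hxb hby ih =>
      rename_i b c
      have hstep : pvR E b c ∨ (b = s ∧ c = t) ∨ (b = t ∧ c = s) := by
        rcases hby with hm | hm <;> rcases List.mem_append.1 hm with hm' | hm'
        · exact Or.inl (Or.inl hm')
        · simp only [List.mem_singleton, Prod.mk.injEq] at hm'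
          exact Or.inr (Or.inl hm')
        · exact Or.inl (Or.inr hm')
        · simp only [List.mem_singleton, Prod.mk.injEq] at hm'
          exact Or.inr (Or.inr ⟨hm'.2, hm'.1⟩)
      rcases ih with ih | ⟨h1, h2⟩ | ⟨h1, h2⟩ <;>
        rcases hstep with hr | ⟨hb, hc⟩ | ⟨hb, hc⟩
      · exact Or.inl (ih.tail hr)
      · subst hb hc; exact Or.inr (Or.inl ⟨ih, Relation.ReflTransGen.refl⟩)
      · subst hb hc; exact Or.inr (Or.inr ⟨ih, Relation.ReflTransGen.refl⟩)
      · exact Or.inr (Or.inl ⟨h1, h2.tail hr⟩)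
      · subst hb hc; exact Or.inr (Or.inl ⟨h1, Relation.ReflTransGen.refl⟩)
      · subst hb hc; exact Or.inl h1
      · exact Or.inr (Or.inr ⟨h1, h2.tail hr⟩)
      · subst hb hc; exact Or.inl h1
      · subst hb hc; exact Or.inr (Or.inr ⟨h1, Relation.ReflTransGen.refl⟩)
  · have hedge : pvConn (E ++ [(s, t)]) s t :=
      Relation.ReflTransGen.single (Or.inl (by simp))
    rintro (h | ⟨h1, h2⟩ | ⟨h1, h2⟩)
    · exact pvConn_mono_snoc h
    · exact ((pvConn_mono_snoc h1).trans hedge).trans (pvConn_mono_snoc h2)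
    · exact ((pvConn_mono_snoc h1).trans (pvConn_symm hedge)).trans (pvConn_mono_snoc h2)

theorem pvNodes_snoc (E : List (Int × Int)) (e : Int × Int) :
    pvNodes (E ++ [e]) = pvNodes E ++ [e.1, e.2] := by
  simp [pvNodes]

-- flipping the last edge changes neither pvR nor pvConn nor the nodes (as a set)
theorem pvR_flip {E : List (Int × Int)} {s t : Int} :
    pvR (E ++ [(s, t)]) = pvR (E ++ [(t, s)]) := by
  funext x y
  simp only [pvR, List.mem_append, List.mem_singleton, Prod.mk.injEq, eq_iff_iff]
  tauto

theorem pvConn_flip {E : List (Int × Int)} {s t : Int} :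
    pvConn (E ++ [(s, t)]) = pvConn (E ++ [(t, s)]) := by
  unfold pvConn
  rw [pvR_flip]

theorem pvNodes_flip_mem {E : List (Int × Int)} {s t x : Int} :
    x ∈ pvNodes (E ++ [(s, t)]) ↔ x ∈ pvNodes (E ++ [(t, s)]) := by
  simp only [pvNodes, List.mem_flatMap]
  constructor <;> rintro ⟨e, he, hx⟩ <;> rcases List.mem_append.1 he with he' | he'
  · exact ⟨e, by simp [he'], hx⟩
  · simp only [List.mem_singleton] at he'; subst he'
    exact ⟨(t, s), by simp, by simpa [or_comm] using hx⟩
  · exact ⟨e, by simp [he'], hx⟩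
  · simp only [List.mem_singleton] at he'; subst he'
    exact ⟨(s, t), by simp, by simpa [or_comm] using hx⟩

-- ==================================================================
-- 3b. normalized pair lists of a nodup component list
-- ==================================================================

theorem pvPairSublist {l : List Int} (hnd : l.Nodup) {x y : Int}
    (hx : x ∈ l) (hy : y ∈ l) (hne : x ≠ y) :
    [x, y].Sublist l ∨ [y, x].Sublist l := by
  induction l with
  | nil => cases hx
  | cons a l ih =>
    rcases List.mem_cons.1 hx with rfl | hx'
    · have hy' : y ∈ l := by
        rcases List.mem_cons.1 hy with rfl | h
        · exact absurd rfl hne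
        · exact h
      exact Or.inl ((List.singleton_sublist.2 hy').cons₂ x)
    · rcases List.mem_cons.1 hy with rfl | hy'
      · exact Or.inr ((List.singleton_sublist.2 hx').cons₂ y)
      · rcases ih (List.Nodup.of_cons hnd) hx' hy' with h | h
        · exact Or.inl (h.cons a)
        · exact Or.inr (h.cons a)

theorem pvPairsOf_mem {l : List Int} (hnd : l.Nodup) (p : Int × Int) :
    p ∈ pvPairsOf l ↔ p.1 < p.2 ∧ p.1 ∈ l ∧ p.2 ∈ l := by
  constructor
  · intro hp
    rcases List.mem_map.1 hp with ⟨c, hc, hcp⟩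
    rcases (PySem.List.mem_combinations_iff l 2 c).1 hc with ⟨hsub, hlen⟩
    match c, hlen with
    | [x, y], _ =>
      have hxy : x ≠ y := by
        have := hsub.nodup hnd
        simp at this
        exact this
      have hx : x ∈ l := hsub.subset (by simp)
      have hy : y ∈ l := hsub.subset (by simp)
      subst hcp
      refine ⟨min_lt_max.2 hxy, ?_, ?_⟩
      · rcases min_choice x y with h | h <;> simp [pvNorm, h, hx, hy]
      · rcases max_choice x y with h | h <;> simp [pvNorm, h, hx, hy]
  · rintro ⟨hlt, h1, h2⟩
    have hne : p.1 ≠ p.2 := ne_of_lt hlt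
    have hmin : min p.1 p.2 = p.1 := min_eq_left hlt.le
    have hmax : max p.1 p.2 = p.2 := max_eq_right hlt.le
    rcases pvPairSublist hnd h1 h2 hne with h | h
    · exact List.mem_map.2 ⟨[p.1, p.2], (PySem.List.mem_combinations_iff l 2 _).2 ⟨h, rfl⟩,
        by simp [pvNorm, hmin, hmax]⟩
    · exact List.mem_map.2 ⟨[p.2, p.1], (PySem.List.mem_combinations_iff l 2 _).2 ⟨h, rfl⟩,
        by simp [pvNorm, min_comm p.2 p.1, max_comm p.2 p.1, hmin, hmax]⟩

theorem pvPairsOf_nodup {l : List Int} (hnd : l.Nodup) : (pvPairsOf l).Nodup := by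
  induction l with
  | nil => simp [pvPairsOf, PySem.List.combinations_nil_succ]
  | cons x l ih =>
    have hxl : x ∉ l := (List.nodup_cons.1 hnd).1
    have hl : l.Nodup := (List.nodup_cons.1 hnd).2
    have hrw : pvPairsOf (x :: l)
        = l.map (fun y => (min x y, max x y)) ++ pvPairsOf l := by
      rw [pvPairsOf, PySem.List.combinations_cons_succ, PySem.List.combinations_one,
        List.map_append, List.map_map, List.map_map]
      rfl
    rw [hrw, List.nodup_append]
    refine ⟨?_, ih hl, ?_⟩
    · refine List.Nodup.map_on ?_ hl
      intro a ha b hb hab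
      simp only [Prod.ext_iff] at hab
      have hsum : x + a = x + b := by
        rw [← min_add_max x a, ← min_add_max x b, hab.1, hab.2]
      omega
    · intro p hp q hq hpq
      subst hpq
      rcases List.mem_map.1 hp with ⟨y, hy, hpy⟩
      have hx : p.1 = x ∨ p.2 = x := by
        have hsum : p.1 + p.2 = x + y := by rw [← hpy]; exact min_add_max x y
        rcases min_choice x y with h | h
        · left; rw [← hpy]; exact h
        · right
          have : p.1 = y := by rw [← hpy]; exact h
          omega
      have hq1 : p.1 ∈ l ∧ p.2 ∈ l := by
        have := (pvPairsOf_mem hl p).1 hq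
        exact ⟨this.2.1, this.2.2⟩
      rcases hx with h | h
      · exact hxl (h ▸ hq1.1)
      · exact hxl (h ▸ hq1.2)

theorem pvFlatten_mem_nodup {bs : List (List Int)} {b : List Int}
    (hnd : bs.flatten.Nodup) (hb : b ∈ bs) : b.Nodup := by
  induction bs with
  | nil => cases hb
  | cons c bs ih =>
    rw [List.flatten_cons, List.nodup_append] at hnd
    rcases List.mem_cons.1 hb with rfl | hb'
    · exact hnd.1
    · exact ih hnd.2.1 hb'

theorem pvFlatPairs_nodup {bs : List (List Int)} (hnd : bs.flatten.Nodup) :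
    (bs.flatMap pvPairsOf).Nodup := by
  induction bs with
  | nil => simp
  | cons b bs ih =>
    rw [List.flatten_cons, List.nodup_append] at hnd
    rw [List.flatMap_cons, List.nodup_append]
    refine ⟨pvPairsOf_nodup hnd.1, ih hnd.2.1, ?_⟩
    intro p hp q hq hpq
    subst hpq
    rcases List.mem_flatMap.1 hq with ⟨b', hb', hq'⟩
    have h1 : p.1 ∈ b := ((pvPairsOf_mem hnd.1 p).1 hp).2.1
    have h2 : p.1 ∈ b' := ((pvPairsOf_mem (pvFlatten_mem_nodup hnd.2.1 hb') p).1 hq').2.1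
    exact hnd.2.2 p.1 h1 p.1 (List.mem_flatten.2 ⟨b', hb', h2⟩) rfl

-- ==================================================================
-- 3c. the merge loop maintains: blocks are the connected components
-- ==================================================================

-- adding an edge whose source is a fresh node
theorem pvConn_snoc_fresh {E : List (Int × Int)} {s t x y : Int} (hsn : s ∉ pvNodes E) :
    pvConn (E ++ [(s, t)]) x y ↔
      pvConn E x y ∨ (x = s ∧ pvConn E t y) ∨ (pvConn E x t ∧ y = s) := by
  constructor
  · intro h
    rcases pvConn_snoc.1 h with h | ⟨ha, hb⟩ | ⟨ha, hb⟩
    · exact Or.inl h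
    · rcases Decidable.em (x = s) with rfl | hne
      · exact Or.inr (Or.inl ⟨rfl, hb⟩)
      · exact absurd (pvConn_mem_nodes ha hne).2 hsn
    · exact Or.inr (Or.inr ⟨ha, pvConn_of_not_node hsn hb⟩)
  · have hedge : pvConn (E ++ [(s, t)]) s t :=
      Relation.ReflTransGen.single (Or.inl (by simp))
    rintro (h | ⟨rfl, h⟩ | ⟨h, rfl⟩)
    · exact pvConn_mono_snoc h
    · exact hedge.trans (pvConn_mono_snoc h)
    · exact (pvConn_mono_snoc h).trans (pvConn_symm hedge)

def pvInv (E : List (Int × Int)) (bs : List (List Int)) : Prop :=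
  bs.flatten.Nodup ∧
  (∀ x, x ∈ bs.flatten ↔ x ∈ pvNodes E) ∧
  (∀ b ∈ bs, ∀ x ∈ b, ∀ y ∈ b, pvConn E x y) ∧
  (∀ b ∈ bs, ∀ x ∈ b, ∀ y, pvConn E x y → y ∈ b)

theorem pvInv_perm {E : List (Int × Int)} {bs bs' : List (List Int)}
    (hp : bs.Perm bs') (h : pvInv E bs) : pvInv E bs' := by
  obtain ⟨h1, h2, h3, h4⟩ := h
  have hf : bs.flatten.Perm bs'.flatten := hp.flatten
  exact ⟨hf.nodup_iff.1 h1,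
    fun x => (hf.mem_iff.symm.trans (h2 x)),
    fun b hb => h3 b (hp.mem_iff.2 hb),
    fun b hb => h4 b (hp.mem_iff.2 hb)⟩

theorem pvInv_flip {E : List (Int × Int)} {s t : Int} {bs : List (List Int)}
    (h : pvInv (E ++ [(t, s)]) bs) : pvInv (E ++ [(s, t)]) bs := by
  obtain ⟨h1, h2, h3, h4⟩ := h
  refine ⟨h1, fun x => ((h2 x).trans pvNodes_flip_mem.symm), ?_, ?_⟩
  · intro b hb x hx y hy
    rw [pvConn_flip]
    exact h3 b hb x hx y hy
  · intro b hb x hx y hc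
    rw [pvConn_flip] at hc
    exact h4 b hb x hx y hc

-- both endpoints fresh: connectivity only gains the pair {s, t}
theorem pvConn_snoc_fresh2 {E : List (Int × Int)} {s t x y : Int}
    (hsn : s ∉ pvNodes E) (htn : t ∉ pvNodes E) :
    pvConn (E ++ [(s, t)]) x y ↔
      pvConn E x y ∨ (x = s ∧ y = t) ∨ (x = t ∧ y = s) := by
  rw [pvConn_snoc_fresh hsn]
  constructor
  · rintro (h | ⟨rfl, h⟩ | ⟨h, rfl⟩)
    · exact Or.inl h
    · exact Or.inr (Or.inl ⟨rfl, pvConn_of_not_node htn h⟩)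
    · exact Or.inr (Or.inr ⟨pvConn_of_not_node htn (pvConn_symm h), rfl⟩)
  · rintro (h | ⟨rfl, rfl⟩ | ⟨rfl, rfl⟩)
    · exact Or.inl h
    · exact Or.inr (Or.inl ⟨rfl, Relation.ReflTransGen.refl⟩)
    · exact Or.inr (Or.inr ⟨Relation.ReflTransGen.refl, rfl⟩)

-- a fresh edge: both endpoints unseen, a new block is appended
theorem pvInv_fresh {E : List (Int × Int)} {s t : Int} {bs : List (List Int)}
    (h : pvInv E bs) (hs : s ∉ bs.flatten) (ht : t ∉ bs.flatten) :
    pvInv (E ++ [(s, t)]) (bs ++ [if s = t then [s] else [s, t]]) := by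
  obtain ⟨h1, h2, h3, h4⟩ := h
  have hsn : s ∉ pvNodes E := fun hc => hs ((h2 s).2 hc)
  have htn : t ∉ pvNodes E := fun hc => ht ((h2 t).2 hc)
  have hblk : ∀ x, x ∈ (if s = t then [s] else [s, t]) ↔ x = s ∨ x = t := by
    intro x
    split
    · rename_i hst; subst hst; simp
    · simp
  have hblkf : (bs ++ [if s = t then [s] else [s, t]]).flatten = bs.flatten ++ (if s = t then [s] else [s, t]) := by
    simp
  refine ⟨?_, ?_, ?_, ?_⟩
  · rw [hblkf, List.nodup_append]
    refine ⟨h1, ?_, ?_⟩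
    · split
      · simp
      · rename_i hst; simp [hst]
    · intro a ha b hb
      rcases (hblk b).1 hb with rfl | rfl
      · exact fun hc => hs (hc ▸ ha)
      · exact fun hc => ht (hc ▸ ha)
  · intro x
    rw [hblkf, pvNodes_snoc]
    simp only [List.mem_append, hblk, h2, List.mem_cons,
      List.not_mem_nil, or_false]
  · intro b hb x hx y hy
    rcases List.mem_append.1 hb with hb' | hb'
    · exact pvConn_mono_snoc (h3 b hb' x hx y hy)
    · rw [List.mem_singleton] at hb'
      subst hb'
      rw [pvConn_snoc_fresh2 hsn htn]
      rcases (hblk x).1 hx with rfl | rfl <;> rcases (hblk y).1 hy with rfl | rfl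
      · exact Or.inl Relation.ReflTransGen.refl
      · exact Or.inr (Or.inl ⟨rfl, rfl⟩)
      · exact Or.inr (Or.inr ⟨rfl, rfl⟩)
      · exact Or.inl Relation.ReflTransGen.refl
  · intro b hb x hx y hc
    rw [pvConn_snoc_fresh2 hsn htn] at hc
    rcases List.mem_append.1 hb with hb' | hb'
    · rcases hc with h | ⟨rfl, rfl⟩ | ⟨rfl, rfl⟩
      · exact h4 b hb' x hx y h
      · exact absurd (List.mem_flatten.2 ⟨b, hb', hx⟩) hs
      · exact absurd (List.mem_flatten.2 ⟨b, hb', hx⟩) ht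
    · rw [List.mem_singleton] at hb'
      subst hb'
      rw [hblk]
      rcases hc with h | ⟨rfl, rfl⟩ | ⟨rfl, rfl⟩
      · rcases (hblk x).1 hx with rfl | rfl
        · exact Or.inl (pvConn_of_not_node hsn h)
        · exact Or.inr (pvConn_of_not_node htn h)
      · exact Or.inr rfl
      · exact Or.inl rfl

-- attach the fresh node s to the block containing t (cons form)
theorem pvInvCons_attach {E : List (Int × Int)} {s t : Int} {c : List Int} {R : List (List Int)}
    (h : pvInv E (c :: R)) (ht : t ∈ c) (hs : s ∉ (c :: R).flatten) :
    pvInv (E ++ [(s, t)]) ((c ++ [s]) :: R) := by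
  obtain ⟨h1, h2, h3, h4⟩ := h
  have hsn : s ∉ pvNodes E := fun hc => hs ((h2 s).2 hc)
  have hsc : s ∉ c := fun hc => hs (by simp [List.flatten_cons, hc])
  have hsR : s ∉ R.flatten := fun hc => hs (by simp [List.flatten_cons, hc])
  have hedge : pvConn (E ++ [(s, t)]) s t :=
    Relation.ReflTransGen.single (Or.inl (by simp))
  have hcdisj : ∀ a ∈ c, a ∉ R.flatten := by
    rw [List.flatten_cons, List.nodup_append] at h1
    exact fun a ha hc => h1.2.2 a ha a hc rfl
  refine ⟨?_, ?_, ?_, ?_⟩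
  · rw [List.flatten_cons, List.nodup_append] at h1 ⊢
    refine ⟨?_, h1.2.1, ?_⟩
    · rw [List.nodup_append]
      exact ⟨h1.1, by simp, fun a ha b hb => by
        rw [List.mem_singleton] at hb
        subst hb
        exact fun hc => hsc (hc ▸ ha)⟩
    · intro a ha b hb
      rcases List.mem_append.1 ha with ha' | ha'
      · exact h1.2.2 a ha' b hb
      · rw [List.mem_singleton] at ha'
        subst ha'
        exact fun hc => hsR (hc ▸ hb)
  · intro x
    rw [List.flatten_cons, pvNodes_snoc]
    have hx := h2 x
    rw [List.flatten_cons] at hx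
    have htn' : t ∈ pvNodes E := (h2 t).1 (by simp [List.flatten_cons, ht])
    simp only [List.mem_append, List.mem_cons, List.not_mem_nil, or_false] at hx ⊢
    constructor
    · rintro ((hx' | rfl) | hx')
      · exact Or.inl (hx.1 (Or.inl hx'))
      · exact Or.inr (Or.inl rfl)
      · exact Or.inl (hx.1 (Or.inr hx'))
    · rintro (hn | rfl | rfl)
      · rcases hx.2 hn with hx' | hx'
        · exact Or.inl (Or.inl hx')
        · exact Or.inr hx'
      · exact Or.inl (Or.inr rfl)
      · exact Or.inl (Or.inl ht)
  · intro b hb x hx y hy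
    rcases List.mem_cons.1 hb with rfl | hb'
    · have hall : ∀ z ∈ c ++ [s], pvConn (E ++ [(s, t)]) t z := by
        intro z hz
        rcases List.mem_append.1 hz with hz' | hz'
        · exact pvConn_mono_snoc (h3 c (by simp) t ht z hz')
        · rw [List.mem_singleton] at hz'
          subst hz'
          exact pvConn_symm hedge
      exact (pvConn_symm (hall x hx)).trans (hall y hy)
    · exact pvConn_mono_snoc (h3 b (by simp [hb']) x hx y hy)
  · intro b hb x hx y hc
    rw [pvConn_snoc_fresh hsn] at hc
    rcases List.mem_cons.1 hb with rfl | hb'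
    · rcases List.mem_append.1 hx with hx' | hx'
      · rcases hc with h | ⟨rfl, h⟩ | ⟨h, rfl⟩
        · exact List.mem_append.2 (Or.inl (h4 c (by simp) x hx' y h))
        · exact absurd hx' hsc
        · simp
      · rw [List.mem_singleton] at hx'
        subst hx'
        rcases hc with h | ⟨_, h⟩ | ⟨h, hy⟩
        · rcases pvConn_of_not_node hsn h with rfl
          simp
        · exact List.mem_append.2 (Or.inl (h4 c (by simp) t ht y h))
        · exact List.mem_append.2 (Or.inr (by simp [hy]))
    · rcases hc with h | ⟨rfl, h⟩ | ⟨h, rfl⟩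
      · exact h4 b (by simp [hb']) x hx y h
      · exact absurd (List.mem_flatten.2 ⟨b, hb', hx⟩) hsR
      · -- pvConn E x t puts t in b, but t lies in c, disjoint from R
        have htb : t ∈ b := h4 b (by simp [hb']) x hx t h
        exact absurd (List.mem_flatten.2 ⟨b, hb', htb⟩) (hcdisj t ht)

-- edge inside one block: nothing changes
theorem pvBlocks_eq_of_shared {bs : List (List Int)} (hnd : bs.flatten.Nodup)
    {b b' : List Int} (hb : b ∈ bs) (hb' : b' ∈ bs) {z : Int}
    (hz : z ∈ b) (hz' : z ∈ b') : b = b' := by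
  induction bs with
  | nil => cases hb
  | cons a r ih =>
    rw [List.flatten_cons, List.nodup_append] at hnd
    rcases List.mem_cons.1 hb with rfl | hb1 <;> rcases List.mem_cons.1 hb' with rfl | hb2
    · rfl
    · exact absurd rfl (hnd.2.2 z hz z (List.mem_flatten.2 ⟨b', hb2, hz'⟩))
    · exact absurd rfl (hnd.2.2 z hz' z (List.mem_flatten.2 ⟨b, hb1, hz⟩))
    · exact ih hnd.2.1 hb1 hb2

theorem pvInv_same {E : List (Int × Int)} {s t : Int} {bs : List (List Int)} {b : List Int}
    (h : pvInv E bs) (hb : b ∈ bs) (hs : s ∈ b) (ht : t ∈ b) :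
    pvInv (E ++ [(s, t)]) bs := by
  obtain ⟨h1, h2, h3, h4⟩ := h
  refine ⟨h1, ?_, ?_, ?_⟩
  · intro x
    rw [pvNodes_snoc]
    simp only [List.mem_append, List.mem_cons, List.not_mem_nil, or_false, h2]
    constructor
    · exact fun hx => Or.inl hx
    · rintro (hx | rfl | rfl)
      · exact hx
      · exact (h2 x).1 (List.mem_flatten.2 ⟨b, hb, hs⟩)
      · exact (h2 x).1 (List.mem_flatten.2 ⟨b, hb, ht⟩)
  · intro b' hb' x hx y hy
    exact pvConn_mono_snoc (h3 b' hb' x hx y hy)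
  · intro b' hb' x hx y hc
    rcases pvConn_snoc.1 hc with hcc | ⟨ha, hb2⟩ | ⟨ha, hb2⟩
    · exact h4 b' hb' x hx y hcc
    · have hsb' : s ∈ b' := h4 b' hb' x hx s ha
      have : b' = b := pvBlocks_eq_of_shared h1 hb' hb hsb' hs
      subst this
      exact h4 b' hb' t ht y hb2
    · have htb' : t ∈ b' := h4 b' hb' x hx t ha
      have : b' = b := pvBlocks_eq_of_shared h1 hb' hb htb' ht
      subst this
      exact h4 b' hb' s hs y hb2

-- edge between two distinct blocks: they merge (cons form)
theorem pvInvCons_merge {E : List (Int × Int)} {s t : Int} {c₁ c₂ : List Int}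
    {R : List (List Int)} (h : pvInv E (c₁ :: c₂ :: R)) (hs : s ∈ c₁) (ht : t ∈ c₂) :
    pvInv (E ++ [(s, t)]) ((c₁ ++ c₂) :: R) := by
  obtain ⟨h1, h2, h3, h4⟩ := h
  have hedge : pvConn (E ++ [(s, t)]) s t :=
    Relation.ReflTransGen.single (Or.inl (by simp))
  have hflat : ((c₁ ++ c₂) :: R).flatten = (c₁ :: c₂ :: R).flatten := by
    simp
  have hd12 : ∀ a ∈ c₁, a ∉ c₂ := by
    rw [List.flatten_cons, List.nodup_append] at h1
    exact fun a ha hc => h1.2.2 a ha a (by simp [hc]) rfl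
  have hd1R : ∀ a ∈ c₁, a ∉ R.flatten := by
    rw [List.flatten_cons, List.nodup_append] at h1
    exact fun a ha hc => h1.2.2 a ha a (by simp [hc]) rfl
  have hd2R : ∀ a ∈ c₂, a ∉ R.flatten := by
    rw [List.flatten_cons, List.flatten_cons, List.nodup_append, List.nodup_append] at h1
    exact fun a ha hc => h1.2.1.2.2 a ha a hc rfl
  have hall : ∀ z ∈ c₁ ++ c₂, pvConn (E ++ [(s, t)]) s z := by
    intro z hz
    rcases List.mem_append.1 hz with hz' | hz'
    · exact pvConn_mono_snoc (h3 c₁ (by simp) s hs z hz')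
    · exact hedge.trans (pvConn_mono_snoc (h3 c₂ (by simp) t ht z hz'))
  refine ⟨?_, ?_, ?_, ?_⟩
  · rw [hflat]; exact h1
  · intro x
    rw [hflat, pvNodes_snoc]
    simp only [List.mem_append, List.mem_cons, List.not_mem_nil, or_false, h2]
    constructor
    · exact fun hx => Or.inl hx
    · rintro (hx | rfl | rfl)
      · exact hx
      · exact (h2 x).1 (by simp [List.flatten_cons, hs])
      · exact (h2 x).1 (by simp [List.flatten_cons, ht])
  · intro b hb x hx y hy
    rcases List.mem_cons.1 hb with rfl | hb'
    · exact (pvConn_symm (hall x hx)).trans (hall y hy)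
    · exact pvConn_mono_snoc (h3 b (by simp [hb']) x hx y hy)
  · intro b hb x hx y hc
    rcases List.mem_cons.1 hb with rfl | hb'
    · rcases pvConn_snoc.1 hc with hcc | ⟨ha, hb2⟩ | ⟨ha, hb2⟩
      · rcases List.mem_append.1 hx with hx' | hx'
        · exact List.mem_append.2 (Or.inl (h4 c₁ (by simp) x hx' y hcc))
        · exact List.mem_append.2 (Or.inr (h4 c₂ (by simp) x hx' y hcc))
      · exact List.mem_append.2 (Or.inr (h4 c₂ (by simp) t ht y hb2))
      · exact List.mem_append.2 (Or.inl (h4 c₁ (by simp) s hs y hb2))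
    · rcases pvConn_snoc.1 hc with hcc | ⟨ha, hb2⟩ | ⟨ha, hb2⟩
      · exact h4 b (by simp [hb']) x hx y hcc
      · have hsb : s ∈ b := h4 b (by simp [hb']) x hx s ha
        exact absurd (List.mem_flatten.2 ⟨b, hb', hsb⟩) (hd1R s hs)
      · have htb : t ∈ b := h4 b (by simp [hb']) x hx t ha
        exact absurd (List.mem_flatten.2 ⟨b, hb', htb⟩) (hd2R t ht)

-- locate semantics
theorem pvLocateAux_spec (bs : List (List Int)) (x : Int) : ∀ i : Int,
    (x ∉ bs.flatten ∧ pvLocateAux bs x i = -1) ∨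
    (∃ (k : Nat) (hk : k < bs.length), x ∈ bs[k] ∧ pvLocateAux bs x i = i + k) := by
  induction bs with
  | nil => intro i; exact Or.inl ⟨by simp, rfl⟩
  | cons b r ih =>
    intro i
    by_cases hxb : x ∈ b
    · refine Or.inr ⟨0, by simp, by simpa using hxb, ?_⟩
      simp [pvLocateAux, hxb]
    · rcases ih (i + 1) with ⟨hnm, heq⟩ | ⟨k, hk, hm, heq⟩
      · refine Or.inl ⟨?_, ?_⟩
        · simp [List.flatten_cons, hxb, hnm]
        · simp [pvLocateAux, hxb, heq]
      · refine Or.inr ⟨k + 1, by simpa using Nat.succ_lt_succ hk, by simpa using hm, ?_⟩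
        simp only [pvLocateAux, hxb, if_false]
        rw [heq]
        push_cast
        ring

-- list surgery
theorem pvSetAt {α : Type} (u v : List α) (c x : α) :
    (u ++ c :: v).set u.length x = u ++ x :: v := by
  induction u with
  | nil => rfl
  | cons a u ih => simp [List.set_cons_succ, ih]

theorem pvEraseAt {α : Type} (u v : List α) (c : α) :
    (u ++ c :: v).eraseIdx u.length = u ++ v := by
  induction u with
  | nil => simp
  | cons a u ih => simp [List.eraseIdx_cons_succ, ih]

theorem pvDecomp {α : Type} (l : List α) (k : Nat) (hk : k < l.length) :
    l = l.take k ++ l[k] :: l.drop (k + 1) := by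
  conv_lhs => rw [← List.take_append_drop k l]
  rw [List.drop_eq_getElem_cons hk]

theorem pvTwoSplit {α : Type} (l : List α) (ka kb : Nat) (hab : ka < kb) (hkb : kb < l.length) :
    ∃ P Q R, l = P ++ (l[ka]'(Nat.lt_trans hab hkb)) :: (Q ++ l[kb] :: R) ∧
      P.length = ka ∧ Q.length = kb - ka - 1 := by
  have hP₂ := pvDecomp l kb hkb
  have hkk : ka < (l.take kb).length := by
    rw [List.length_take_of_le hkb.le]
    exact hab
  have h1 := pvDecomp (l.take kb) ka hkk
  have hgt : (l.take kb)[ka]'hkk = l[ka]'(Nat.lt_trans hab hkb) := List.getElem_take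
  refine ⟨(l.take kb).take ka, (l.take kb).drop (ka + 1), l.drop (kb + 1), ?_, ?_, ?_⟩
  · conv_lhs => rw [hP₂]
    conv_lhs => rw [h1, hgt]
    simp [List.append_assoc]
  · rw [List.length_take_of_le]
    rw [List.length_take_of_le hkb.le]
    exact hab.le
  · rw [List.length_drop, List.length_take_of_le hkb.le]
    omega

theorem pvMerge_case_lt {E : List (Int × Int)} {bs : List (List Int)} {s t : Int}
    {k₁ k₂ : Nat} (h : pvInv E bs) (hk₁ : k₁ < bs.length) (hk₂ : k₂ < bs.length)
    (hlt : k₁ < k₂) (hs1 : s ∈ bs[k₁]) (ht1 : t ∈ bs[k₂]) :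
    pvInv (E ++ [(s, t)]) ((bs.set k₁ (bs[k₁] ++ bs[k₂])).eraseIdx k₂) := by
  obtain ⟨P, Q, R, hbs, hP, hQ⟩ := pvTwoSplit bs k₁ k₂ hlt hk₂
  generalize hc₁ : bs[k₁] = c₁ at hbs hs1 ⊢
  generalize hc₂ : bs[k₂] = c₂ at hbs ht1 ⊢
  have hset : bs.set k₁ (c₁ ++ c₂) = P ++ (c₁ ++ c₂) :: (Q ++ c₂ :: R) := by
    have hx := pvSetAt P (Q ++ c₂ :: R) c₁ (c₁ ++ c₂)
    rw [hP, ← hbs] at hx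
    exact hx
  have hers : (P ++ (c₁ ++ c₂) :: (Q ++ c₂ :: R)).eraseIdx k₂
      = P ++ (c₁ ++ c₂) :: (Q ++ R) := by
    have hx := pvEraseAt (P ++ (c₁ ++ c₂) :: Q) R c₂
    have hlen : (P ++ (c₁ ++ c₂) :: Q).length = k₂ := by
      simp [hP, hQ]
      omega
    rw [hlen] at hx
    simpa [List.append_assoc] using hx
  rw [hset, hers]
  have hper1 : bs.Perm (c₁ :: c₂ :: (P ++ Q ++ R)) := by
    rw [hbs]
    refine List.perm_middle.trans (List.Perm.cons c₁ ?_)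
    have hx : ((P ++ Q) ++ c₂ :: R).Perm (c₂ :: (P ++ Q ++ R)) := List.perm_middle
    simpa [List.append_assoc] using hx
  have hm := pvInvCons_merge (pvInv_perm hper1 h) hs1 ht1
  refine pvInv_perm ?_ hm
  have hx : (P ++ (c₁ ++ c₂) :: (Q ++ R)).Perm ((c₁ ++ c₂) :: (P ++ (Q ++ R))) :=
    List.perm_middle
  refine (List.Perm.symm ?_)
  simp [List.append_assoc]

theorem pvMerge_case_gt {E : List (Int × Int)} {bs : List (List Int)} {s t : Int}
    {k₁ k₂ : Nat} (h : pvInv E bs) (hk₁ : k₁ < bs.length) (hk₂ : k₂ < bs.length)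
    (hlt : k₂ < k₁) (hs1 : s ∈ bs[k₁]) (ht1 : t ∈ bs[k₂]) :
    pvInv (E ++ [(s, t)]) ((bs.set k₁ (bs[k₁] ++ bs[k₂])).eraseIdx k₂) := by
  obtain ⟨P, Q, R, hbs, hP, hQ⟩ := pvTwoSplit bs k₂ k₁ hlt hk₁
  generalize hc₁ : bs[k₁] = c₁ at hbs hs1 ⊢
  generalize hc₂ : bs[k₂] = c₂ at hbs ht1 ⊢
  have hset : bs.set k₁ (c₁ ++ c₂) = P ++ c₂ :: (Q ++ (c₁ ++ c₂) :: R) := by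
    have hx := pvSetAt (P ++ c₂ :: Q) R c₁ (c₁ ++ c₂)
    have hlen : (P ++ c₂ :: Q).length = k₁ := by
      simp [hP, hQ]
      omega
    rw [hlen] at hx
    rw [show (P ++ c₂ :: Q) ++ c₁ :: R = P ++ c₂ :: (Q ++ c₁ :: R) by simp [List.append_assoc]] at hx
    rw [← hbs] at hx
    rw [hx]
    simp [List.append_assoc]
  have hers : (P ++ c₂ :: (Q ++ (c₁ ++ c₂) :: R)).eraseIdx k₂
      = P ++ (Q ++ (c₁ ++ c₂) :: R) := by
    have hx := pvEraseAt P (Q ++ (c₁ ++ c₂) :: R) c₂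
    rw [hP] at hx
    exact hx
  rw [hset, hers]
  have hper1 : bs.Perm (c₁ :: c₂ :: (P ++ Q ++ R)) := by
    rw [hbs]
    have h0 : P ++ c₂ :: (Q ++ c₁ :: R) = (P ++ c₂ :: Q) ++ c₁ :: R := by
      simp [List.append_assoc]
    rw [h0]
    refine List.perm_middle.trans (List.Perm.cons c₁ ?_)
    have hx : (P ++ c₂ :: (Q ++ R)).Perm (c₂ :: (P ++ (Q ++ R))) := List.perm_middle
    simp [List.append_assoc]
  have hm := pvInvCons_merge (pvInv_perm hper1 h) hs1 ht1
  refine pvInv_perm ?_ hm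
  refine (List.Perm.symm ?_)
  have hx : ((P ++ Q) ++ (c₁ ++ c₂) :: R).Perm ((c₁ ++ c₂) :: (P ++ Q ++ R)) :=
    List.perm_middle
  simpa [List.append_assoc] using hx

-- the merge step preserves the invariant
theorem pvMergeStep_inv {E : List (Int × Int)} {bs : List (List Int)} {s t : Int}
    (h : pvInv E bs) : pvInv (E ++ [(s, t)]) (pvMergeStep bs (s, t)) := by
  have hL := pvLocateAux_spec bs s 0
  have hM := pvLocateAux_spec bs t 0
  rcases hL with ⟨hsf, hsl⟩ | ⟨k₁, hk₁, hs1, hsl⟩ <;>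
    rcases hM with ⟨htf, htl⟩ | ⟨k₂, hk₂, ht1, htl⟩
  · -- both fresh
    have hbs' : pvMergeStep bs (s, t) = bs ++ [if s = t then [s] else [s, t]] := by
      simp [pvMergeStep, pvLocate, hsl, htl]
    rw [hbs']
    exact pvInv_fresh h hsf htf
  · -- s fresh, t in block k₂
    rw [zero_add] at htl
    have hknn : ((k₂ : Int)) ≠ -1 := by omega
    have hbs' : pvMergeStep bs (s, t) = bs.set k₂ (bs[k₂] ++ [s]) := by
      simp [pvMergeStep, pvLocate, hsl, htl, hknn, List.getElem?_eq_getElem hk₂]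
    rw [hbs']
    have hdec := pvDecomp bs k₂ hk₂
    have hlen : (bs.take k₂).length = k₂ := List.length_take_of_le (Nat.le_of_lt hk₂)
    have hset := pvSetAt (bs.take k₂) (bs.drop (k₂ + 1)) bs[k₂] (bs[k₂] ++ [s])
    rw [hlen, ← hdec] at hset
    rw [hset]
    have hmid : pvInv E (bs[k₂] :: (bs.take k₂ ++ bs.drop (k₂ + 1))) := by
      refine pvInv_perm ?_ h
      conv_lhs => rw [hdec]
      exact List.perm_middle
    have hs' : s ∉ (bs[k₂] :: (bs.take k₂ ++ bs.drop (k₂ + 1))).flatten := by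
      intro hc
      apply hsf
      have : (bs[k₂] :: (bs.take k₂ ++ bs.drop (k₂ + 1))).Perm bs := by
        conv_rhs => rw [hdec]
        exact List.perm_middle.symm
      exact this.flatten.mem_iff.1 hc
    have := pvInvCons_attach hmid ht1 hs'
    refine pvInv_perm ?_ this
    exact List.perm_middle.symm
  · -- t fresh, s in block k₁
    rw [zero_add] at hsl
    have hknn : ((k₁ : Int)) ≠ -1 := by omega
    have hbs' : pvMergeStep bs (s, t) = bs.set k₁ (bs[k₁] ++ [t]) := by
      simp [pvMergeStep, pvLocate, hsl, htl, hknn, List.getElem?_eq_getElem hk₁]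
    rw [hbs']
    apply pvInv_flip
    have hdec := pvDecomp bs k₁ hk₁
    have hlen : (bs.take k₁).length = k₁ := List.length_take_of_le (Nat.le_of_lt hk₁)
    have hset := pvSetAt (bs.take k₁) (bs.drop (k₁ + 1)) bs[k₁] (bs[k₁] ++ [t])
    rw [hlen, ← hdec] at hset
    rw [hset]
    have hmid : pvInv E (bs[k₁] :: (bs.take k₁ ++ bs.drop (k₁ + 1))) := by
      refine pvInv_perm ?_ h
      conv_lhs => rw [hdec]
      exact List.perm_middle
    have ht' : t ∉ (bs[k₁] :: (bs.take k₁ ++ bs.drop (k₁ + 1))).flatten := by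
      intro hc
      apply htf
      have : (bs[k₁] :: (bs.take k₁ ++ bs.drop (k₁ + 1))).Perm bs := by
        conv_rhs => rw [hdec]
        exact List.perm_middle.symm
      exact this.flatten.mem_iff.1 hc
    have := pvInvCons_attach hmid hs1 ht'
    refine pvInv_perm ?_ this
    exact List.perm_middle.symm
  · -- both found
    rw [zero_add] at hsl htl
    have hk1nn : ((k₁ : Int)) ≠ -1 := by omega
    have hk2nn : ((k₂ : Int)) ≠ -1 := by omega
    by_cases hkk : k₁ = k₂
    · subst hkk
      have hbs' : pvMergeStep bs (s, t) = bs := by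
        simp [pvMergeStep, pvLocate, hsl, htl, hk1nn]
      rw [hbs']
      exact pvInv_same h (List.getElem_mem hk₁) hs1 ht1
    · have hbs' : pvMergeStep bs (s, t) = (bs.set k₁ (bs[k₁] ++ bs[k₂])).eraseIdx k₂ := by
        simp [pvMergeStep, pvLocate, hsl, htl, hk1nn, hk2nn, hkk,
          List.getElem?_eq_getElem hk₁, List.getElem?_eq_getElem hk₂]
      rw [hbs']
      rcases Nat.lt_or_ge k₁ k₂ with hlt | hge
      · exact pvMerge_case_lt h hk₁ hk₂ hlt hs1 ht1
      · have hlt : k₂ < k₁ := Nat.lt_of_le_of_ne hge (fun hc => hkk hc.symm)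
        exact pvMerge_case_gt h hk₁ hk₂ hlt hs1 ht1

-- ==================================================================
-- 3d. A's DFS: adjacency facts, dfs specification, per-interest loop
-- ==================================================================

-- adjacency relation and connectivity of the built dict
def pvAdjR (adj : PySem.Dict Int (PySem.Set Int)) (a b : Int) : Prop :=
  b ∈ adj.getD a PySem.Set.empty

def pvConnAdj (adj : PySem.Dict Int (PySem.Set Int)) : Int → Int → Prop :=
  Relation.ReflTransGen (pvAdjR adj)

theorem pvAdj_mem (E : List (Int × Int)) :
    ∀ x y, pvAdjR (pvAdj E) x y ↔ pvR E x y := by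
  induction E using List.reverseRecOn with
  | nil =>
    intro x y
    simp [pvAdjR, pvAdj, pvR, PySem.Dict.getD_empty]
  | append_singleton E e ih =>
    intro x y
    cases e with
    | mk s t =>
      have hstep : pvAdjR (pvAdj (E ++ [(s, t)])) x y ↔
          pvAdjR (pvAdj E) x y ∨ (x = s ∧ y = t) ∨ (x = t ∧ y = s) := by
        simp only [pvAdj, List.foldl_append, List.foldl_cons, List.foldl_nil]
        rw [show List.foldl (fun a e => pvAdjStep a e.1 e.2) PySem.Dict.empty E = pvAdj E from rfl]
        simp only [pvAdjR, pvAdjStep, PySem.Dict.getD_insert]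
        by_cases hxt : x = t <;> by_cases hxs : x = s
        · subst hxt hxs
          simp [PySem.Set.mem_add]
          try tauto
        · subst hxt
          simp [hxs, PySem.Set.mem_add]
          try tauto
        · subst hxs
          simp [hxt, PySem.Set.mem_add]
          try tauto
        · simp [hxt, hxs]
      rw [hstep, ih]
      simp only [pvR, List.mem_append, List.mem_singleton, Prod.mk.injEq]
      tauto

theorem pvAdj_keys_mem (E : List (Int × Int)) :
    ∀ x, x ∈ (pvAdj E).keys ↔ x ∈ pvNodes E := by
  induction E using List.reverseRecOn with
  | nil =>
    intro x
    simp [pvAdj, pvNodes, PySem.Dict.keys_empty]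
  | append_singleton E e ih =>
    intro x
    cases e with
    | mk s t =>
      simp only [pvAdj, List.foldl_append, List.foldl_cons, List.foldl_nil]
      rw [show List.foldl (fun a e => pvAdjStep a e.1 e.2) PySem.Dict.empty E = pvAdj E from rfl]
      simp only [pvAdjStep, PySem.Dict.mem_keys_insert, pvNodes_snoc]
      simp [ih, List.mem_append]
      tauto

theorem pvConnAdj_iff (E : List (Int × Int)) (x y : Int) :
    pvConnAdj (pvAdj E) x y ↔ pvConn E x y := by
  constructor
  · exact Relation.ReflTransGen.mono (fun a b h => (pvAdj_mem E a b).1 h)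
  · exact Relation.ReflTransGen.mono (fun a b h => (pvAdj_mem E a b).2 h)

theorem pvNodupLenLe {l₁ l₂ : List Int} (h : l₁.Nodup) (hs : l₁ ⊆ l₂) :
    l₁.length ≤ l₂.length := by
  calc l₁.length = l₁.toFinset.card := (List.toFinset_card_of_nodup h).symm
    _ ≤ l₂.toFinset.card := Finset.card_le_card (fun a ha => by
        rw [List.mem_toFinset] at ha ⊢
        exact hs ha)
    _ ≤ l₂.length := l₂.toFinset_card_le

-- DFS step relation avoiding a visited set
def pvStepR (adj : PySem.Dict Int (PySem.Set Int)) (vis : List Int) (a b : Int) : Prop :=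
  pvAdjR adj a b ∧ b ∉ vis

def pvReach (adj : PySem.Dict Int (PySem.Set Int)) (vis : List Int) : Int → Int → Prop :=
  Relation.ReflTransGen (pvStepR adj vis)

theorem pvReach_mono {adj : PySem.Dict Int (PySem.Set Int)} {vis vis' : List Int}
    (hsub : ∀ x ∈ vis, x ∈ vis') {n x : Int} (h : pvReach adj vis' n x) :
    pvReach adj vis n x :=
  h.mono (fun _ b ⟨h1, h2⟩ => ⟨h1, fun hc => h2 (hsub b hc)⟩)

-- the specification of pvDfsA, by induction on fuel
theorem pvDfs_spec (adj : PySem.Dict Int (PySem.Set Int)) :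
    ∀ (fuel : Nat) (vis cc : List Int) (n : Int),
      (∀ a b, pvAdjR adj a b → b ∈ adj.keys) →
      n ∈ adj.keys →
      (∀ v ∈ vis, v ∈ adj.keys) → vis.Nodup →
      adj.keys.length + 1 ≤ fuel + vis.length →
      ∃ Δ : List Int,
        (pvDfsA adj fuel n (vis, cc)).1 = vis ++ Δ ∧
        (pvDfsA adj fuel n (vis, cc)).2 = cc ++ Δ ∧
        Δ.Nodup ∧ (∀ x ∈ Δ, x ∉ vis ∧ x ∈ adj.keys) ∧
        (n ∉ vis → n ∈ vis ++ Δ) ∧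
        (∀ x ∈ Δ, pvReach adj vis n x) ∧
        (∀ a ∈ Δ, ∀ b, pvAdjR adj a b → b ∈ vis ++ Δ) := by
  intro fuel
  induction fuel with
  | zero =>
    intro vis cc n hedge hn hvk hvnd hfuel
    exact absurd (pvNodupLenLe hvnd hvk) (by omega)
  | succ fuel ih =>
    -- the fold over the neighbour list, proven by an inner induction
    have hfold : ∀ (ns : List Int) (vis cc : List Int),
        (∀ a b, pvAdjR adj a b → b ∈ adj.keys) →
        (∀ m ∈ ns, m ∈ adj.keys) →
        (∀ v ∈ vis, v ∈ adj.keys) → vis.Nodup →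
        adj.keys.length + 1 ≤ fuel + vis.length →
        ∃ Δ : List Int,
          (ns.foldl (fun st nb => pvDfsA adj fuel nb st) (vis, cc)).1 = vis ++ Δ ∧
          (ns.foldl (fun st nb => pvDfsA adj fuel nb st) (vis, cc)).2 = cc ++ Δ ∧
          Δ.Nodup ∧ (∀ x ∈ Δ, x ∉ vis ∧ x ∈ adj.keys) ∧
          (∀ m ∈ ns, m ∈ vis ++ Δ) ∧
          (∀ x ∈ Δ, ∃ m ∈ ns, m ∉ vis ∧ pvReach adj vis m x) ∧
          (∀ a ∈ Δ, ∀ b, pvAdjR adj a b → b ∈ vis ++ Δ) := by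
      intro ns
      induction ns with
      | nil =>
        intro vis cc hedge hns hvk hvnd hfuel
        exact ⟨[], by simp, by simp, by simp, by simp, by simp, by simp, by simp⟩
      | cons m ns ihn =>
        intro vis cc hedge hns hvk hvnd hfuel
        obtain ⟨Δ₁, hv1, hc1, hnd1, hfr1, hm1, hs1, hcl1⟩ :=
          ih vis cc m hedge (hns m (by simp)) hvk hvnd (by omega)
        have hvk' : ∀ v ∈ vis ++ Δ₁, v ∈ adj.keys := by
          intro v hv
          rcases List.mem_append.1 hv with hv | hv
          · exact hvk v hv
          · exact (hfr1 v hv).2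
        have hvnd' : (vis ++ Δ₁).Nodup := by
          rw [List.nodup_append]
          exact ⟨hvnd, hnd1, fun a ha b hb hab => (hfr1 b hb).1 (hab ▸ ha)⟩
        have hfuel' : adj.keys.length + 1 ≤ fuel + (vis ++ Δ₁).length := by
          rw [List.length_append]
          omega
        obtain ⟨Δ₂, hv2, hc2, hnd2, hfr2, hm2, hs2, hcl2⟩ :=
          ihn (vis ++ Δ₁) (cc ++ Δ₁) hedge (fun m' hm' => hns m' (by simp [hm'])) hvk' hvnd' hfuel'
        rw [List.foldl_cons]
        have hr1 : pvDfsA adj fuel m (vis, cc) = (vis ++ Δ₁, cc ++ Δ₁) := by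
          rw [Prod.ext_iff]
          exact ⟨hv1, hc1⟩
        rw [hr1]
        refine ⟨Δ₁ ++ Δ₂, by rw [hv2, List.append_assoc], by rw [hc2, List.append_assoc],
          ?_, ?_, ?_, ?_, ?_⟩
        · rw [List.nodup_append]
          refine ⟨hnd1, hnd2, ?_⟩
          intro a ha b hb hab
          exact (hfr2 b hb).1 (List.mem_append.2 (Or.inr (hab ▸ ha)))
        · intro x hx
          rcases List.mem_append.1 hx with hx | hx
          · exact hfr1 x hx
          · refine ⟨fun hc => (hfr2 x hx).1 (List.mem_append.2 (Or.inl hc)), (hfr2 x hx).2⟩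
        · intro m' hm'
          rcases List.mem_cons.1 hm' with rfl | hm''
          · by_cases hmv : m' ∈ vis
            · simp [hmv]
            · have := hm1 hmv
              simp only [List.mem_append] at this ⊢
              tauto
          · have := hm2 m' hm''
            simp only [List.mem_append] at this ⊢
            tauto
        · intro x hx
          rcases List.mem_append.1 hx with hx | hx
          · by_cases hmv : m ∈ vis
            · -- then the dfs call returned immediately and Δ₁ is empty
              have heq : pvDfsA adj fuel m (vis, cc) = (vis, cc) := by
                cases fuel with
                | zero =>
                  exact absurd (pvNodupLenLe hvnd hvk) (by omega)
                | succ fuel' =>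
                  simp [pvDfsA, hmv]
              have hveq : vis ++ Δ₁ = vis := by
                rw [heq] at hv1
                simpa using hv1.symm
              have hΔnil : Δ₁ = [] := by
                have hl := congrArg List.length hveq
                simp at hl
                exact hl
              rw [hΔnil] at hx
              cases hx
            · exact ⟨m, by simp, hmv, hs1 x hx⟩
          · obtain ⟨m', hm', hmv', hr⟩ := hs2 x hx
            refine ⟨m', by simp [hm'], fun hc => hmv' (List.mem_append.2 (Or.inl hc)), ?_⟩
            exact pvReach_mono (fun z hz => List.mem_append.2 (Or.inl hz)) hr
        · intro a ha b hab
          rcases List.mem_append.1 ha with ha | ha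
          · have := hcl1 a ha b hab
            simp only [List.mem_append] at this ⊢
            tauto
          · have := hcl2 a ha b hab
            simp only [List.mem_append] at this ⊢
            tauto
    -- now the body of pvDfsA at fuel + 1
    intro vis cc n hedge hn hvk hvnd hfuel
    by_cases hnv : n ∈ vis
    · refine ⟨[], by simp [pvDfsA, hnv], by simp [pvDfsA, hnv], by simp, by simp, ?_, by simp, by simp⟩
      intro hc
      exact absurd hnv hc
    · have hstep : pvDfsA adj (fuel + 1) n (vis, cc)
          = (adj.getD n PySem.Set.empty : List Int).foldl (fun st nb => pvDfsA adj fuel nb st)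
              (vis ++ [n], cc ++ [n]) := by
        simp [pvDfsA, hnv]
      have hvk1 : ∀ v ∈ vis ++ [n], v ∈ adj.keys := by
        intro v hv
        rcases List.mem_append.1 hv with hv | hv
        · exact hvk v hv
        · rw [List.mem_singleton] at hv
          exact hv ▸ hn
      have hvnd1 : (vis ++ [n]).Nodup := by
        rw [List.nodup_append]
        refine ⟨hvnd, by simp, fun a ha b hb hab => ?_⟩
        rw [List.mem_singleton] at hb
        subst hb
        exact hnv (hab ▸ ha)
      obtain ⟨Δf, hvf, hcf, hndf, hfrf, hmf, hsf, hclf⟩ :=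
        hfold (adj.getD n PySem.Set.empty) (vis ++ [n]) (cc ++ [n]) hedge
          (fun m hm => hedge n m hm) hvk1 hvnd1 (by
            rw [List.length_append]
            simp
            omega)
      rw [hstep]
      refine ⟨n :: Δf, ?_, ?_, ?_, ?_, ?_, ?_, ?_⟩
      · rw [hvf]
        simp
      · rw [hcf]
        simp
      · rw [List.nodup_cons]
        exact ⟨fun hc => (hfrf n hc).1 (by simp), hndf⟩
      · intro x hx
        rcases List.mem_cons.1 hx with rfl | hx'
        · exact ⟨hnv, hn⟩
        · exact ⟨fun hc => (hfrf x hx').1 (by simp [hc]), (hfrf x hx').2⟩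
      · intro _
        simp
      · intro x hx
        rcases List.mem_cons.1 hx with rfl | hx'
        · exact Relation.ReflTransGen.refl
        · obtain ⟨m, hm, hmv, hr⟩ := hsf x hx'
          have hstep1 : pvStepR adj vis n m :=
            ⟨hm, fun hc => hmv (by simp [hc])⟩
          exact Relation.ReflTransGen.head hstep1
            (pvReach_mono (fun z hz => by simp [hz]) hr)
      · intro a ha b hab
        rcases List.mem_cons.1 ha with rfl | ha'
        · have := hmf b hab
          simp only [List.mem_append, List.mem_cons] at this ⊢
          tauto
        · have := hclf a ha' b hab
          simp only [List.mem_append, List.mem_cons] at this ⊢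
          tauto

theorem pvConnAdj_symm {adj : PySem.Dict Int (PySem.Set Int)}
    (hsym : ∀ a b, pvAdjR adj a b → pvAdjR adj b a) {x y : Int}
    (h : pvConnAdj adj x y) : pvConnAdj adj y x :=
  Relation.ReflTransGen.symmetric (fun a b hr => hsym a b hr) h

theorem pvClosed_reach {adj : PySem.Dict Int (PySem.Set Int)} {vis : List Int}
    (hcl : ∀ a ∈ vis, ∀ b, pvAdjR adj a b → b ∈ vis) {k x : Int}
    (hk : k ∈ vis) (h : pvConnAdj adj k x) : x ∈ vis := by
  induction h with
  | refl => exact hk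
  | tail _ hstep ih => exact hcl _ ih _ hstep

-- at a call site whose visited set is closed, dfs collects exactly the
-- unvisited connected component of n (and the result stays closed)
theorem pvDfs_closed (adj : PySem.Dict Int (PySem.Set Int))
    (hedge : ∀ a b, pvAdjR adj a b → b ∈ adj.keys)
    (hsym : ∀ a b, pvAdjR adj a b → pvAdjR adj b a)
    (vis cc : List Int) (n : Int) (hn : n ∈ adj.keys)
    (hvk : ∀ v ∈ vis, v ∈ adj.keys) (hvnd : vis.Nodup)
    (hcl : ∀ a ∈ vis, ∀ b, pvAdjR adj a b → b ∈ vis) :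
    ∃ Δ : List Int,
      (pvDfsA adj (adj.keys.length + 1) n (vis, cc)).1 = vis ++ Δ ∧
      (pvDfsA adj (adj.keys.length + 1) n (vis, cc)).2 = cc ++ Δ ∧
      Δ.Nodup ∧ (∀ x ∈ Δ, x ∈ adj.keys) ∧
      (∀ x, x ∈ Δ ↔ n ∉ vis ∧ x ∉ vis ∧ pvConnAdj adj n x) ∧
      (∀ a ∈ vis ++ Δ, ∀ b, pvAdjR adj a b → b ∈ vis ++ Δ) := by
  by_cases hnv : n ∈ vis
  · refine ⟨[], by simp [pvDfsA, hnv], by simp [pvDfsA, hnv], by simp, by simp, ?_, ?_⟩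
    · intro x
      simp [hnv]
    · intro a ha b hab
      simp only [List.append_nil] at ha ⊢
      exact hcl a ha b hab
  · obtain ⟨Δ, hv, hc, hnd, hfr, hm, hs, hclp⟩ :=
      pvDfs_spec adj (adj.keys.length + 1) vis cc n hedge hn hvk hvnd (by omega)
    have hmemup : ∀ y, pvReach adj vis n y → y ∈ vis ++ Δ := by
      intro y hy
      induction hy with
      | refl => exact hm hnv
      | tail _ hstep ih =>
        rename_i b c _
        rcases List.mem_append.1 ih with hbv | hbΔ
        · exact List.mem_append.2 (Or.inl (hcl b hbv c hstep.1))
        · exact hclp b hbΔ c hstep.1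
    refine ⟨Δ, hv, hc, hnd, fun x hx => (hfr x hx).2, ?_, ?_⟩
    · intro x
      constructor
      · intro hx
        exact ⟨hnv, (hfr x hx).1, (hs x hx).mono (fun a b hr => hr.1)⟩
      · rintro ⟨-, hxv, hconn⟩
        have hreach : ∀ y, pvConnAdj adj n y → y ∉ vis ∧ pvReach adj vis n y := by
          intro y hy
          induction hy with
          | refl => exact ⟨hnv, Relation.ReflTransGen.refl⟩
          | tail _ hstep ih =>
            rename_i b c _
            have hcv : c ∉ vis := fun hcv => ih.1 (hcl c hcv b (hsym b c hstep))
            exact ⟨hcv, ih.2.tail ⟨hstep, hcv⟩⟩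
        have hx := hmemup x (hreach x hconn).2
        rcases List.mem_append.1 hx with hx' | hx'
        · exact absurd hx' hxv
        · exact hx'
    · intro a ha b hab
      rcases List.mem_append.1 ha with ha' | ha'
      · exact List.mem_append.2 (Or.inl (hcl a ha' b hab))
      · exact hclp a ha' b hab

-- the whole per-interest key loop of A
theorem pvLoopA (E : List (Int × Int)) :
    ∀ (ks : List Int) (vis : PySem.Set Int) (out : List (Int × Int)),
      (∀ k ∈ ks, k ∈ (pvAdj E).keys) →
      (∀ v ∈ vis, v ∈ (pvAdj E).keys) → List.Nodup vis →
      (∀ a ∈ vis, ∀ b, pvAdjR (pvAdj E) a b → b ∈ vis) →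
      (∀ p : Int × Int, p ∈ out ↔ p.1 < p.2 ∧ pvConn E p.1 p.2 ∧ p.1 ∈ vis) →
      out.Nodup →
      (∀ p : Int × Int,
        p ∈ (ks.foldl
          (fun (st : PySem.Set Int × List (Int × Int)) node =>
            let r := pvDfsA (pvAdj E) ((pvAdj E).keys.length + 1) node (st.1, [])
            (r.1, st.2 ++ pvPairsOf r.2)) (vis, out)).2 ↔
          p.1 < p.2 ∧ pvConn E p.1 p.2 ∧
            p.1 ∈ (ks.foldl
              (fun (st : PySem.Set Int × List (Int × Int)) node =>
                let r := pvDfsA (pvAdj E) ((pvAdj E).keys.length + 1) node (st.1, [])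
                (r.1, st.2 ++ pvPairsOf r.2)) (vis, out)).1) ∧
      ((ks.foldl
          (fun (st : PySem.Set Int × List (Int × Int)) node =>
            let r := pvDfsA (pvAdj E) ((pvAdj E).keys.length + 1) node (st.1, [])
            (r.1, st.2 ++ pvPairsOf r.2)) (vis, out)).2).Nodup ∧
      (∀ x, x ∈ (ks.foldl
          (fun (st : PySem.Set Int × List (Int × Int)) node =>
            let r := pvDfsA (pvAdj E) ((pvAdj E).keys.length + 1) node (st.1, [])
            (r.1, st.2 ++ pvPairsOf r.2)) (vis, out)).1 ↔
          x ∈ vis ∨ ∃ k ∈ ks, pvConn E k x) := by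
  have hedge : ∀ a b, pvAdjR (pvAdj E) a b → b ∈ (pvAdj E).keys := by
    intro a b h
    rw [pvAdj_keys_mem]
    exact (pvR_mem_nodes ((pvAdj_mem E a b).1 h)).2
  have hsym : ∀ a b, pvAdjR (pvAdj E) a b → pvAdjR (pvAdj E) b a := by
    intro a b h
    rw [pvAdj_mem] at h ⊢
    exact pvR_symm h
  intro ks
  induction ks with
  | nil =>
    intro vis out _ _ _ _ hout houtnd
    exact ⟨hout, houtnd, fun x => by simp⟩
  | cons k ks ihk =>
    intro vis out hks hvk hvnd hcl hout houtnd
    obtain ⟨Δ, hv, hc, hnd, hkeys, hmem, hcl'⟩ :=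
      pvDfs_closed (pvAdj E) hedge hsym vis [] k (hks k (by simp)) hvk hvnd hcl
    simp only [List.foldl_cons]
    rw [show (pvDfsA (pvAdj E) ((pvAdj E).keys.length + 1) k (vis, [])) = (vis ++ Δ, [] ++ Δ) from
      Prod.ext_iff.2 ⟨hv, hc⟩]
    simp only [List.nil_append]
    -- the new visited set is vis ++ Δ, the new stream is out ++ pvPairsOf Δ
    have hΔfresh : ∀ x ∈ Δ, x ∉ vis := fun x hx => ((hmem x).1 hx).2.1
    have hvnd' : (vis ++ Δ).Nodup := by
      rw [List.nodup_append]
      exact ⟨hvnd, hnd, fun a ha b hb hab => hΔfresh b hb (hab ▸ ha)⟩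
    have hvk' : ∀ v ∈ vis ++ Δ, v ∈ (pvAdj E).keys := by
      intro v hv'
      rcases List.mem_append.1 hv' with h | h
      · exact hvk v h
      · exact hkeys v h
    have hcl'' : ∀ a ∈ vis ++ Δ, ∀ b, pvAdjR (pvAdj E) a b → b ∈ vis ++ Δ := hcl'
    have hvmem : ∀ x, x ∈ vis ++ Δ ↔ x ∈ vis ∨ pvConn E k x := by
      intro x
      constructor
      · intro hx
        rcases List.mem_append.1 hx with h | h
        · exact Or.inl h
        · exact Or.inr ((pvConnAdj_iff E k x).1 ((hmem x).1 h).2.2)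
      · rintro (h | h)
        · exact List.mem_append.2 (Or.inl h)
        · by_cases hkv : k ∈ vis
          · exact List.mem_append.2
              (Or.inl (pvClosed_reach hcl hkv ((pvConnAdj_iff E k x).2 h)))
          · by_cases hxv : x ∈ vis
            · exact absurd (pvClosed_reach hcl hxv
                (pvConnAdj_symm hsym ((pvConnAdj_iff E k x).2 h))) hkv
            · exact List.mem_append.2
                (Or.inr ((hmem x).2 ⟨hkv, hxv, (pvConnAdj_iff E k x).2 h⟩))
    have hpairs : ∀ p : Int × Int, p ∈ pvPairsOf Δ ↔
        p.1 < p.2 ∧ p.1 ∈ Δ ∧ p.2 ∈ Δ := fun p => pvPairsOf_mem hnd p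
    have hout' : ∀ p : Int × Int, p ∈ out ++ pvPairsOf Δ ↔
        p.1 < p.2 ∧ pvConn E p.1 p.2 ∧ p.1 ∈ vis ++ Δ := by
      intro p
      rw [List.mem_append, hout, hpairs]
      constructor
      · rintro (⟨h1, h2, h3⟩ | ⟨h1, h2, h3⟩)
        · exact ⟨h1, h2, List.mem_append.2 (Or.inl h3)⟩
        · have hc1 : pvConnAdj (pvAdj E) k p.1 := ((hmem p.1).1 h2).2.2
          have hc2 : pvConnAdj (pvAdj E) k p.2 := ((hmem p.2).1 h3).2.2
          exact ⟨h1, (pvConnAdj_iff E _ _).1 ((pvConnAdj_symm hsym hc1).trans hc2),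
            List.mem_append.2 (Or.inr h2)⟩
      · rintro ⟨h1, h2, h3⟩
        rcases List.mem_append.1 h3 with h3' | h3'
        · exact Or.inl ⟨h1, h2, h3'⟩
        · refine Or.inr ⟨h1, h3', ?_⟩
          have hk1 : k ∉ vis := ((hmem p.1).1 h3').1
          have hx1 : p.1 ∉ vis := ((hmem p.1).1 h3').2.1
          have hck1 : pvConnAdj (pvAdj E) k p.1 := ((hmem p.1).1 h3').2.2
          have hck2 : pvConnAdj (pvAdj E) k p.2 :=
            hck1.trans ((pvConnAdj_iff E _ _).2 h2)
          have hx2 : p.2 ∉ vis := by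
            intro hc
            exact hx1 (pvClosed_reach hcl hc
              (pvConnAdj_symm hsym ((pvConnAdj_iff E _ _).2 h2)))
          exact (hmem p.2).2 ⟨hk1, hx2, hck2⟩
    have houtnd' : (out ++ pvPairsOf Δ).Nodup := by
      rw [List.nodup_append]
      refine ⟨houtnd, pvPairsOf_nodup hnd, ?_⟩
      intro p hp q hq hpq
      subst hpq
      have h1 : p.1 ∈ vis := ((hout p).1 hp).2.2
      have h2 : p.1 ∈ Δ := ((hpairs p).1 hq).2.1
      exact hΔfresh p.1 h2 h1
    obtain ⟨hA, hB, hC⟩ := ihk (vis ++ Δ) (out ++ pvPairsOf Δ)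
      (fun k' hk' => hks k' (by simp [hk'])) hvk' hvnd' hcl'' hout' houtnd'
    refine ⟨hA, hB, ?_⟩
    intro x
    rw [hC x, hvmem x]
    simp only [List.mem_cons]
    constructor
    · rintro ((h | h) | ⟨k', hk', hconn⟩)
      · exact Or.inl h
      · exact Or.inr ⟨k, Or.inl rfl, h⟩
      · exact Or.inr ⟨k', Or.inr hk', hconn⟩
    · rintro (h | ⟨k', hk' | hk', hconn⟩)
      · exact Or.inl (Or.inl h)
      · exact Or.inl (Or.inr (hk' ▸ hconn))
      · exact Or.inr ⟨k', hk', hconn⟩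

theorem pvStreamA_char (E : List (Int × Int)) :
    (∀ p : Int × Int, p ∈ pvStreamA (pvAdj E) ↔
      p.1 < p.2 ∧ pvConn E p.1 p.2 ∧
        p.1 ∈ ((pvAdj E).keys.foldl
          (fun (st : PySem.Set Int × List (Int × Int)) node =>
            let r := pvDfsA (pvAdj E) ((pvAdj E).keys.length + 1) node (st.1, [])
            (r.1, st.2 ++ pvPairsOf r.2)) (PySem.Set.empty, [])).1) ∧
    (pvStreamA (pvAdj E)).Nodup ∧
    (∀ x, x ∈ ((pvAdj E).keys.foldl
          (fun (st : PySem.Set Int × List (Int × Int)) node =>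
            let r := pvDfsA (pvAdj E) ((pvAdj E).keys.length + 1) node (st.1, [])
            (r.1, st.2 ++ pvPairsOf r.2)) (PySem.Set.empty, [])).1 ↔
        x ∈ (PySem.Set.empty : List Int) ∨ ∃ k ∈ (pvAdj E).keys, pvConn E k x) :=
  pvLoopA E (pvAdj E).keys PySem.Set.empty []
    (fun _ hk => hk)
    (fun v hv => absurd hv (by simp [PySem.Set.empty]))
    List.nodup_nil
    (fun a ha => absurd ha (by simp [PySem.Set.empty]))
    (fun p => by simp [PySem.Set.empty])
    List.nodup_nil

theorem pvStreamA_nodup (E : List (Int × Int)) : (pvStreamA (pvAdj E)).Nodup :=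
  (pvStreamA_char E).2.1

theorem pvStreamA_mem (E : List (Int × Int)) (p : Int × Int) :
    p ∈ pvStreamA (pvAdj E) ↔ p.1 < p.2 ∧ pvConn E p.1 p.2 := by
  obtain ⟨hA, _, hC⟩ := pvStreamA_char E
  rw [hA p]
  constructor
  · rintro ⟨h1, h2, _⟩
    exact ⟨h1, h2⟩
  · rintro ⟨h1, h2⟩
    refine ⟨h1, h2, (hC p.1).2 (Or.inr ⟨p.1, ?_, Relation.ReflTransGen.refl⟩)⟩
    rw [pvAdj_keys_mem]
    exact (pvConn_mem_nodes h2 (ne_of_lt h1)).1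

theorem pvBlocks_inv (E : List (Int × Int)) : pvInv E (E.foldl pvMergeStep []) := by
  induction E using List.reverseRecOn with
  | nil =>
    refine ⟨by simp, by simp [pvNodes], by simp, by simp⟩
  | append_singleton E e ih =>
    rw [List.foldl_append, List.foldl_cons, List.foldl_nil]
    cases e with
    | mk s t => exact pvMergeStep_inv ih

theorem pvStreamB_eq (E : List (Int × Int)) :
    pvStreamB E = (E.foldl pvMergeStep []).flatMap pvPairsOf := by
  rfl

theorem pvStreamB_nodup (E : List (Int × Int)) : (pvStreamB E).Nodup := by
  rw [pvStreamB_eq]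
  exact pvFlatPairs_nodup (pvBlocks_inv E).1

theorem pvStreamB_mem (E : List (Int × Int)) (p : Int × Int) :
    p ∈ pvStreamB E ↔ p.1 < p.2 ∧ pvConn E p.1 p.2 := by
  obtain ⟨h1, h2, h3, h4⟩ := pvBlocks_inv E
  rw [pvStreamB_eq, List.mem_flatMap]
  constructor
  · rintro ⟨b, hb, hp⟩
    have hmem := (pvPairsOf_mem (pvFlatten_mem_nodup h1 hb) p).1 hp
    exact ⟨hmem.1, h3 b hb p.1 hmem.2.1 p.2 hmem.2.2⟩
  · rintro ⟨hlt, hconn⟩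
    have hne : p.1 ≠ p.2 := ne_of_lt hlt
    have hn1 : p.1 ∈ (E.foldl pvMergeStep []).flatten :=
      (h2 p.1).2 (pvConn_mem_nodes hconn hne).1
    rcases List.mem_flatten.1 hn1 with ⟨b, hb, hxb⟩
    have hyb : p.2 ∈ b := h4 b hb p.1 hxb p.2 hconn
    exact ⟨b, hb, (pvPairsOf_mem (pvFlatten_mem_nodup h1 hb) p).2 ⟨hlt, hxb, hyb⟩⟩

theorem pvStream_perm (E : List (Int × Int)) : (pvStreamA (pvAdj E)).Perm (pvStreamB E) := by
  rw [List.perm_ext_iff_of_nodup (pvStreamA_nodup E) (pvStreamB_nodup E)]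
  intro p
  rw [pvStreamA_mem, pvStreamB_mem]

-- ===== VERDICT (by name: the statement is the Claim_ definition above) =====
theorem MaxSHARED_spec : Claim_equal_MaxSHARED := by
  intro f t w _ _
  unfold Spec_MaxSHARED
  rw [pvA_eq_counter, pvB_eq_counter]
  apply pvExtract_perm
  apply pvCounter_items_perm
  rw [pvA_items, pvB_items, List.flatMap_map, List.flatMap_map]
  exact pvFlatMap_perm _ _ _ (fun v _ => pvStream_perm (pvE ((f.zip t).zip w) v))
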